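-- pv_equiv track=rewrite | github.com/Marco0205/percolation | index.py | ecoulement
-- ===== SOURCE A (Python) =====
-- def trouver_couleur_case(ordonnee, abscisse, grille):
--     """
--     Fonction qui détermine la couleur d'une case donnee
--     Entree : la rangee d'une case donnée, le numero de cette case dans cette rangee, la grille de base
--     Sortie : La couleur de la case donnée
--     """
--     bit_case = grille[ordonnee][abscisse]
--     return(bit_case)
--
-- def couleur_case_droite(ordonnee, abscisse, grille):
--     """
--     Fonction qui détermine la couleur de la case a droite d'une case donnée
--     Entree : la rangee d'une case donnée, le numero de cette case dans cette rangee, la grille de base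
--     Sortie : La couleur de la case a droite de la case donnée en entrée
--     """
--     if abscisse == (len(grille[ordonnee])-1): # on met le -1 car pour la ligne suivante, on compte de 0 a 9 et non de 1 a 10
--         return(None)
--     else:
--         bit_case_droite = grille[ordonnee][abscisse + 1] # abs + 1 car on veut la case de droite
--         return(bit_case_droite)
--
-- def couleur_case_gauche(ordonnee, abscisse, grille):
--     """
--     Fonction qui détermine la couleur de la case a gauche d'une case donnée
--     Entree : la rangee d'une case donnée, le numero de cette case dans cette rangee, la grille de base
--     Sortie : La couleur de la case a gauche de la case donnée en entrée
--     """
--     if abscisse == 0: # car si abs = 0, alors il n'y a pas de case a gauche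
--         return(None)
--     else:
--         bit_case_gauche = grille[ordonnee][abscisse - 1] # abs - 1 car on veut la case de gauche
--         return(bit_case_gauche)
--
-- def couleur_case_dessous(ordonnee, abscisse, grille):
--     """
--     Fonction qui détermine la couleur de la case du dessous
--     Entree : la rangee d'une case donnée, le numero de cette case dans cette rangee, la grille de base
--     Sortie : La couleur de la case en dessous de la case donnée en entrée
--     """
--     if ordonnee == len(grille) - 1:
--         return(None)
--     else:
--         bit_case_dessous = grille[ordonnee + 1][abscisse]
--         return(bit_case_dessous)
--
-- def colorier_ligne1(grille):
--     """
--     Cette fonction colorie les cases jaunes de la premiere ligne d'une grille en bleu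
--     Entree : grille
--     Sortie : la grille avec la premiere ligne modifiee
--     """
--     for i in range(len(grille[0])):
--         couleur_case = trouver_couleur_case(0, i, grille)
--         if couleur_case == 1:
--             grille[0][i] = 2
--     return(grille)
--
-- def ecoulement(grille, taille_liste):
--     """
--     Fonction qui fait le calcul pour l'écoulement du liquide dans la grille
--     Entree : Grille de départ, taille d'une liste de la grille
--     Sortie : la grille avec les bonnes cases coloriees
--     """
--     grille = colorier_ligne1(grille)
--     for k in range(taille_liste-1):
--         for i in range(taille_liste):
--             if trouver_couleur_case(k, i, grille) == 2 and couleur_case_dessous(k, i, grille) == 1: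
--                 grille[k+1][i] = 2
--         for i in range(taille_liste):
--             if trouver_couleur_case(k+1, i, grille) == 2 and couleur_case_droite(k+1, i, grille) == 1:
--                 grille[k+1][i+1] = 2
--         for i in range(taille_liste-1,-1 , -1):
--             if trouver_couleur_case(k+1, i, grille) == 2 and couleur_case_gauche(k+1, i, grille) == 1:
--                 grille[k+1][i-1] = 2
--     return(grille)
-- ===== SOURCE B (Python) =====
-- # Run-based flood fill: each row is segmented into maximal runs of empty (1) cells; a run
-- # floods as a whole iff it is wet from above or flanked by a water (2) cell. Both A and B
-- # mutate grille in place (B rebinds row 0); the equivalence claimed is about the return value.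
-- def ecoulement(grille, taille_liste):
--     grille[0] = [2 if v == 1 else v for v in grille[0]]
--     for r in range(1, taille_liste):
--         prev = grille[r - 1]
--         row = grille[r]
--         c = 0
--         while c < len(row):
--             if row[c] != 1:
--                 c += 1
--                 continue
--             d = c
--             while d < len(row) and row[d] == 1:
--                 d += 1
--             # row[c:d] is a maximal run of empty cells
--             if any(prev[i] == 2 for i in range(c, d)) \
--                     or (c > 0 and row[c - 1] == 2) \
--                     or (d < len(row) and row[d] == 2):
--                 row[c:d] = [2] * (d - c)
--             c = d
--     return grille
-- ===== Notes on version B (the rewrite author's own statement) =====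
-- stated objective: alternative
-- what changed: A wets cells one by one with three ordered directional sweeps per row (down pass, left-to-right neighbour-write pass, right-to-left neighbour-write pass); B segments each row into maximal runs of empty cells with a two-pointer scan and floods a whole run at once iff it is wet from above or flanked by a water cell. …
import Mathlib
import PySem

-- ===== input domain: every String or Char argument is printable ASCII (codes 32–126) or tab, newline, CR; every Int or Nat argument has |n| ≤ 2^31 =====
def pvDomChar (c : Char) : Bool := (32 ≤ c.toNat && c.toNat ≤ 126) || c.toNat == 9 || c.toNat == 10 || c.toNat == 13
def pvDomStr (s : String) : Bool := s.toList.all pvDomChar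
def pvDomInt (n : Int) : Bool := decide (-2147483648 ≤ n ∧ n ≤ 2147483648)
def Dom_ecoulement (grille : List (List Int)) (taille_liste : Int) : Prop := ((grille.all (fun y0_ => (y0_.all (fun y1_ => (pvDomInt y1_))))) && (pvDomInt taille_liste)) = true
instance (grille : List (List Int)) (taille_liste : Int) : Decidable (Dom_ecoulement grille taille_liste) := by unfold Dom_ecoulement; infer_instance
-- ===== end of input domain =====

-- B (run-based flood fill) vs A (three directional sweeps per row); both Pythons mutate the
-- argument in place (B rebinds row 0) — the equivalence proved here is about the RETURN value.

-- ===== PORT A =====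
-- helpers return Option Int: `none` stands both for Python's `None` boundary answer and for an
-- IndexError (the latter cannot occur on inputs admitted by Pre_ecoulement, where the ports are claimed faithful)
def trouverCouleurCase (o a : Int) (g : List (List Int)) : Option Int :=
  (PySem.List.pyGet? g o).bind (fun row => PySem.List.pyGet? row a)

def couleurCaseDroite (o a : Int) (g : List (List Int)) : Option Int :=
  if a = (((PySem.List.pyGet? g o).getD []).length : Int) - 1 then none
  else (PySem.List.pyGet? g o).bind (fun row => PySem.List.pyGet? row (a + 1))

def couleurCaseGauche (o a : Int) (g : List (List Int)) : Option Int :=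
  if a = 0 then none
  else (PySem.List.pyGet? g o).bind (fun row => PySem.List.pyGet? row (a - 1))

def couleurCaseDessous (o a : Int) (g : List (List Int)) : Option Int :=
  if o = (g.length : Int) - 1 then none
  else (PySem.List.pyGet? g (o + 1)).bind (fun row => PySem.List.pyGet? row a)

-- grille[r][c] = v  (total form; out-of-range writes never happen inside Pre_ecoulement)
def setCell (g : List (List Int)) (r c v : Int) : List (List Int) :=
  PySem.List.pySetD g r (PySem.List.pySetD ((PySem.List.pyGet? g r).getD []) c v)

def colorierLigne1 (g : List (List Int)) : List (List Int) :=
  (PySem.List.pyRange 0 ((((PySem.List.pyGet? g 0).getD []).length : Int)) 1).foldl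
    (fun g i => if trouverCouleurCase 0 i g = some 1 then setCell g 0 i 2 else g) g

def ecoulement (grille : List (List Int)) (taille_liste : Int) : List (List Int) :=
  let g0 := colorierLigne1 grille
  (PySem.List.pyRange 0 (taille_liste - 1) 1).foldl (fun g k =>
    let g1 := (PySem.List.pyRange 0 taille_liste 1).foldl (fun g i =>
      if trouverCouleurCase k i g = some 2 ∧ couleurCaseDessous k i g = some 1
      then setCell g (k + 1) i 2 else g) g
    let g2 := (PySem.List.pyRange 0 taille_liste 1).foldl (fun g i =>
      if trouverCouleurCase (k + 1) i g = some 2 ∧ couleurCaseDroite (k + 1) i g = some 1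
      then setCell g (k + 1) (i + 1) 2 else g) g1
    (PySem.List.pyRange (taille_liste - 1) (-1) (-1)).foldl (fun g i =>
      if trouverCouleurCase (k + 1) i g = some 2 ∧ couleurCaseGauche (k + 1) i g = some 1
      then setCell g (k + 1) (i - 1) 2 else g) g2) g0

-- ===== PORT B =====
-- Source B's inner `while d < len(row) and row[d] == 1: d += 1` (end of the maximal run of
-- 1-cells); the fuel argument `row.length - d` only makes the loop total (kernel-reducible)
def runEndF (row : List Int) : Nat → Nat → Nat
  | 0, d => d
  | fuel + 1, d => if d < row.length ∧ row[d]? = some 1 then runEndF row fuel (d + 1) else d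

def runEnd (row : List Int) (d : Nat) : Nat := runEndF row (row.length - d) d

-- Source B's outer `while c < len(row)` loop: scan to the next run of 1-cells, flood it iff it is
-- seeded from above or flanked by a 2-cell, jump to its end.  The fuel `row.length - c` only
-- makes the loop total; `prev[i]` / `row[c-1]` are ported with `.getD 0`: exact whenever the
-- accessed index is in range (guaranteed inside Pre_).
def fillRowF (prev : List Int) : Nat → List Int → Nat → List Int
  | 0, row, _ => row
  | fuel + 1, row, c =>
    if c < row.length then
      if row[c]? ≠ some 1 then fillRowF prev fuel row (c + 1)
      else
        fillRowF prev fuel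
          (if ((List.range' c (runEnd row c - c)).any fun i => (prev[i]?.getD 0) == 2)
              || (decide (0 < c) && ((row[c - 1]?.getD 0) == 2))
              || (decide (runEnd row c < row.length) && ((row[runEnd row c]?.getD 0) == 2))
           then row.take c ++ List.replicate (runEnd row c - c) 2 ++ row.drop (runEnd row c)
           else row)
          (runEnd row c)
    else row

def fillRow (prev row : List Int) (c : Nat) : List Int := fillRowF prev (row.length - c) row c

def ecoulement_alt (grille : List (List Int)) (taille_liste : Int) : List (List Int) :=
  let g := grille.set 0 ((grille.headD []).map (fun v => if v = 1 then 2 else v))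
  (PySem.List.pyRange 1 taille_liste 1).foldl (fun g r =>
    g.set r.toNat (fillRow ((PySem.List.pyGet? g (r - 1)).getD [])
      ((PySem.List.pyGet? g r).getD []) 0)) g

-- ===== PRECONDITION & SPEC =====
-- Pre_ is the set of inputs on which Python A returns normally (nonempty grid; for taille_liste ≥ 2
-- at least taille_liste rows, first row at least taille_liste wide), NARROWED by one stated
-- exclusion: the working rows 1..taille_liste-1 must be EXACTLY taille_liste wide — on wider
-- working rows the treatment of the cells beyond the declared working width is unspecified
-- (A's bounded sweep can wet just the first cell past the bound, B's flood treats the whole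
-- physical row); see claim.json "cites" for a concrete excluded input.
def Pre_ecoulement (grille : List (List Int)) (taille_liste : Int) : Prop :=
  grille ≠ [] ∧ (1 < taille_liste →
    taille_liste ≤ (grille.length : Int) ∧
    taille_liste ≤ ((grille.headD []).length : Int) ∧
    ∀ row ∈ (grille.drop 1).take (taille_liste.toNat - 1), (row.length : Int) = taille_liste)
instance (grille : List (List Int)) (taille_liste : Int) : Decidable (Pre_ecoulement grille taille_liste) := by unfold Pre_ecoulement; infer_instance

def pvWitness_ecoulement : List (List Int) × Int := ([[1, 0, 1], [1, 1, 0], [0, 1, 1]], 3)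

def Spec_ecoulement (grille : List (List Int)) (taille_liste : Int) (out : List (List Int)) : Prop := out = ecoulement_alt grille taille_liste
instance (grille : List (List Int)) (taille_liste : Int) (out : List (List Int)) : Decidable (Spec_ecoulement grille taille_liste out) := by unfold Spec_ecoulement; infer_instance

-- ===== CLAIM (what is proved, stated in full; the proofs are below) =====
def Claim_equal_ecoulement : Prop := ∀ (grille : List (List Int)) (taille_liste : Int), Dom_ecoulement grille taille_liste → Pre_ecoulement grille taille_liste → Spec_ecoulement grille taille_liste (ecoulement grille taille_liste)

-- ===== LEMMAS AND PROOFS =====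

-- proof-side pipeline view of A's three sweeps on one row (down coloring, then a forward and a
-- backward wetness-flag scan); A's in-place sweeps are proved equal to it, and B's run flood too
def altDown (n : Int) (prev cur : List Int) : List Int :=
  (PySem.List.enumerate cur).map (fun cv =>
    if cv.1 < n ∧ PySem.List.pyGet? prev cv.1 = some 2 ∧ cv.2 = 1 then 2 else cv.2)

def altFwd (n : Int) : Bool → Int → List Int → List Int
  | _, _, [] => []
  | wet, c, v :: t =>
    let nv := if v = 1 ∧ wet then 2 else v
    nv :: altFwd n (decide (nv = 2 ∧ c < n)) (c + 1) t

def altBwd (n : Int) : Bool → Int → List Int → List Int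
  | _, _, [] => []
  | wet, c, v :: t =>
    let nv := if v = 1 ∧ wet then 2 else v
    nv :: altBwd n (decide (nv = 2 ∧ c < n)) (c - 1) t

def altRow (n : Int) (prev cur : List Int) : List Int :=
  let row := altDown n prev cur
  let out := altFwd n false 0 row
  (altBwd n false ((out.length : Int) - 1) out.reverse).reverse

-- proof-side row-level views of A's four in-place sweeps (one row at a time)
def rowCol (c : List Int) : List Int :=
  (PySem.List.pyRange 0 (c.length : Int) 1).foldl
    (fun r i => if PySem.List.pyGet? r i = some 1 then PySem.List.pySetD r i 2 else r) c

def rowDown (n : Int) (p c : List Int) : List Int :=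
  (PySem.List.pyRange 0 n 1).foldl
    (fun r i => if PySem.List.pyGet? p i = some 2 ∧ PySem.List.pyGet? r i = some 1
      then PySem.List.pySetD r i 2 else r) c

def rowRight (n : Int) (c : List Int) : List Int :=
  (PySem.List.pyRange 0 n 1).foldl
    (fun r i => if PySem.List.pyGet? r i = some 2 ∧ ¬ i = (r.length : Int) - 1 ∧ PySem.List.pyGet? r (i + 1) = some 1
      then PySem.List.pySetD r (i + 1) 2 else r) c

def rowLeft (n : Int) (c : List Int) : List Int :=
  (PySem.List.pyRange (n - 1) (-1) (-1)).foldl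
    (fun r i => if PySem.List.pyGet? r i = some 2 ∧ ¬ i = 0 ∧ PySem.List.pyGet? r (i - 1) = some 1
      then PySem.List.pySetD r (i - 1) 2 else r) c

-- generic: a foldl over a grid whose every step rewrites only row K is a set of a row-level foldl
theorem foldl_rows_aux {K : Nat} {g : List (List Int)} (hK : K < g.length)
    (step : List (List Int) → Int → List (List Int)) (rstep : List Int → Int → List Int)
    (L : List Int)
    (h : ∀ (g' : List (List Int)) (i : Int), i ∈ L → g'.length = g.length →
      (∀ j : Nat, j ≠ K → g'[j]? = g[j]?) →
      step g' i = g'.set K (rstep (g'[K]?.getD []) i)) :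
    ∀ r : List Int, L.foldl step (g.set K r) = g.set K (L.foldl rstep r) := by
  induction L with
  | nil => intro r; rfl
  | cons i L ih =>
    intro r
    have hlen : (g.set K r).length = g.length := by simp
    have hne : ∀ j : Nat, j ≠ K → (g.set K r)[j]? = g[j]? := by
      intro j hj; exact List.getElem?_set_ne (by omega)
    have hstep := h (g.set K r) i (by simp) hlen hne
    have hget : (g.set K r)[K]? = some r := List.getElem?_set_self hK
    rw [List.foldl_cons, hstep, hget]
    simp only [Option.getD_some, List.set_set]
    exact ih (fun g' i hi => h g' i (by simp [hi])) _

theorem foldl_rows {K : Nat} {g : List (List Int)} (hK : K < g.length)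
    (step : List (List Int) → Int → List (List Int)) (rstep : List Int → Int → List Int)
    (L : List Int)
    (h : ∀ (g' : List (List Int)) (i : Int), i ∈ L → g'.length = g.length →
      (∀ j : Nat, j ≠ K → g'[j]? = g[j]?) →
      step g' i = g'.set K (rstep (g'[K]?.getD []) i)) :
    L.foldl step g = g.set K (L.foldl rstep (g[K]?.getD [])) := by
  have hg : g = g.set K (g[K]?.getD []) := by
    rw [List.getElem?_eq_getElem hK]
    simp
  conv_lhs => rw [hg]
  exact foldl_rows_aux hK step rstep L h _

-- indexing a take/drop splice of two same-length lists
theorem takeDrop_getElem? {α : Type} (A B : List α) (hlen : A.length = B.length) (i j : Nat) :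
    (A.take i ++ B.drop i)[j]? = if j < i then A[j]? else B[j]? := by
  rw [List.getElem?_append]
  simp only [List.length_take]
  rcases Nat.lt_or_ge j (min i A.length) with h | h
  · rw [if_pos h, List.getElem?_take, if_pos (by omega), if_pos (by omega)]
  · rw [if_neg (by omega), List.getElem?_drop]
    split
    · next hj =>
      have hA : A.length ≤ j := by omega
      rw [List.getElem?_eq_none hA, List.getElem?_eq_none (by omega)]
    · next hj =>
      rcases Nat.lt_or_ge A.length i with hiA | hiA
      · rw [List.getElem?_eq_none (by omega), List.getElem?_eq_none (by omega)]
      · congr 1; omega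

theorem takeDrop_set {α : Type} (A B : List α) (hlen : A.length = B.length) (i : Nat)
    (hi : i < B.length) (v : α) :
    (A.take i ++ B.drop i).set i v = A.take i ++ v :: B.drop (i + 1) := by
  rw [List.set_append, if_neg (by simp only [List.length_take]; omega)]
  congr 1
  have h0 : i - (List.take i A).length = 0 := by simp only [List.length_take]; omega
  rw [h0, List.drop_eq_getElem_cons hi]
  rfl

theorem takeDrop_shift {α : Type} (A B : List α) (i : Nat) (hi : i < A.length) (v : α)
    (hv : A[i] = v) : A.take i ++ v :: B.drop (i + 1) = A.take (i + 1) ++ B.drop (i + 1) := by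
  rw [List.take_add_one, List.getElem?_eq_getElem hi, hv]
  simp

-- lengths of the pipeline's row passes
theorem length_altFwd (n : Int) : ∀ (w : Bool) (c₀ : Int) (l : List Int),
    (altFwd n w c₀ l).length = l.length := by
  intro w c₀ l
  induction l generalizing w c₀ with
  | nil => rfl
  | cons v t ih => simp [altFwd, ih]

theorem length_altBwd (n : Int) : ∀ (w : Bool) (c₀ : Int) (l : List Int),
    (altBwd n w c₀ l).length = l.length := by
  intro w c₀ l
  induction l generalizing w c₀ with
  | nil => rfl
  | cons v t ih => simp [altBwd, ih]

theorem length_altDown (n : Int) (p c : List Int) : (altDown n p c).length = c.length := by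
  simp [altDown, PySem.List.length_enumerate]

-- heads of the flag scans
theorem altFwd_head (n : Int) (w : Bool) (c₀ : Int) (v : Int) (t : List Int) :
    (altFwd n w c₀ (v :: t))[0]? = some (if v = 1 ∧ w = true then 2 else v) := by
  simp [altFwd]

theorem altBwd_head (n : Int) (w : Bool) (c₀ : Int) (v : Int) (t : List Int) :
    (altBwd n w c₀ (v :: t))[0]? = some (if v = 1 ∧ w = true then 2 else v) := by
  simp [altBwd]

-- entry recurrences of the flag scans
theorem altFwd_get_succ (n : Int) : ∀ (j : Nat) (w : Bool) (c₀ : Int) (l : List Int),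
    (altFwd n w c₀ l)[j + 1]? = (l[j + 1]?).map (fun v =>
      if v = 1 ∧ (altFwd n w c₀ l)[j]? = some 2 ∧ c₀ + (j : Int) < n then 2 else v) := by
  intro j
  induction j with
  | zero =>
    intro w c₀ l
    match l with
    | [] => rfl
    | [v] => simp [altFwd]
    | v :: v' :: t =>
      rw [show altFwd n w c₀ (v :: v' :: t) =
        (if v = 1 ∧ w then 2 else v) ::
          altFwd n (decide ((if v = 1 ∧ w then 2 else v) = 2 ∧ c₀ < n)) (c₀ + 1) (v' :: t) from rfl]
      simp only [List.getElem?_cons_succ, List.getElem?_cons_zero]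
      rw [altFwd_head]
      simp only [Option.map_some]
      congr 1
      by_cases h1 : v' = 1 <;> by_cases h3 : (if v = 1 ∧ w then 2 else v) = (2:Int) <;>
        by_cases h4 : c₀ < n <;> simp [h1, h3, h4]
  | succ j ih =>
    intro w c₀ l
    match l with
    | [] => rfl
    | v :: t =>
      rw [show altFwd n w c₀ (v :: t) =
        (if v = 1 ∧ w then 2 else v) ::
          altFwd n (decide ((if v = 1 ∧ w then 2 else v) = 2 ∧ c₀ < n)) (c₀ + 1) t from rfl]
      rw [List.getElem?_cons_succ, List.getElem?_cons_succ, List.getElem?_cons_succ, ih]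
      congr 1
      funext x
      congr 2
      push_cast
      ring_nf

theorem altBwd_get_succ (n : Int) : ∀ (j : Nat) (w : Bool) (c₀ : Int) (l : List Int),
    (altBwd n w c₀ l)[j + 1]? = (l[j + 1]?).map (fun v =>
      if v = 1 ∧ (altBwd n w c₀ l)[j]? = some 2 ∧ c₀ - (j : Int) < n then 2 else v) := by
  intro j
  induction j with
  | zero =>
    intro w c₀ l
    match l with
    | [] => rfl
    | [v] => simp [altBwd]
    | v :: v' :: t =>
      rw [show altBwd n w c₀ (v :: v' :: t) =
        (if v = 1 ∧ w then 2 else v) ::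
          altBwd n (decide ((if v = 1 ∧ w then 2 else v) = 2 ∧ c₀ < n)) (c₀ - 1) (v' :: t) from rfl]
      simp only [List.getElem?_cons_succ, List.getElem?_cons_zero]
      rw [altBwd_head]
      simp only [Option.map_some]
      congr 1
      by_cases h1 : v' = 1 <;> by_cases h3 : (if v = 1 ∧ w then 2 else v) = (2:Int) <;>
        by_cases h4 : c₀ < n <;> simp [h1, h3, h4]
  | succ j ih =>
    intro w c₀ l
    match l with
    | [] => rfl
    | v :: t =>
      rw [show altBwd n w c₀ (v :: t) =
        (if v = 1 ∧ w then 2 else v) ::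
          altBwd n (decide ((if v = 1 ∧ w then 2 else v) = 2 ∧ c₀ < n)) (c₀ - 1) t from rfl]
      rw [List.getElem?_cons_succ, List.getElem?_cons_succ, List.getElem?_cons_succ, ih]
      congr 1
      funext x
      congr 2
      push_cast
      ring_nf

-- pointwise description of altDown
theorem altDown_get (n : Int) (p xs : List Int) (j : Nat) :
    (altDown n p xs)[j]? = xs[j]?.map (fun v =>
      if (j : Int) < n ∧ PySem.List.pyGet? p (j : Int) = some 2 ∧ v = 1 then 2 else v) := by
  simp [altDown, List.getElem?_map, PySem.List.getElem?_enumerate]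
  cases xs[j]? <;> simp

-- generic: a left-to-right sweep whose step i rewrites only cell i (deciding by cell i's
-- current value and fixed data) computes any list M that matches its pointwise description
theorem foldl_selfwrite_aux (n : Int) (xs M : List Int) (q : Int → Int → Bool)
    (step : List Int → Int → List Int)
    (hstep : ∀ (r : List Int) (i : Int) (v : Int), PySem.List.pyGet? r i = some v →
      step r i = if q i v then PySem.List.pySetD r i 2 else r)
    (hle : n ≤ (xs.length : Int)) (hlen : M.length = xs.length)
    (hM : ∀ (j : Nat) (hj : j < xs.length), (j : Int) < n → M[j]? = some (if q (j : Int) (xs[j]'hj) then 2 else xs[j]'hj))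
    (hM2 : ∀ j : Nat, n ≤ (j : Int) → M[j]? = xs[j]?) :
    ∀ (d i : Nat), (i : Int) + d = n →
      (PySem.List.pyRange (i : Int) n 1).foldl step (M.take i ++ xs.drop i) = M := by
  intro d
  induction d with
  | zero =>
    intro i hi
    rw [PySem.List.pyRange_one_eq_nil (by omega)]
    have hdrop : xs.drop i = M.drop i := by
      apply List.ext_getElem?
      intro t
      rw [List.getElem?_drop, List.getElem?_drop, hM2 (i + t) (by push_cast; omega)]
    rw [List.foldl_nil, hdrop, List.take_append_drop]
  | succ d ih =>
    intro i hi
    have hin : (i : Int) < n := by omega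
    have hixs : i < xs.length := by
      have := hle; omega
    rw [PySem.List.pyRange_one_cons hin, List.foldl_cons]
    have hS : PySem.List.pyGet? (M.take i ++ xs.drop i) (i : Int) = some xs[i] := by
      rw [PySem.List.pyGet?_natCast, takeDrop_getElem? M xs hlen, if_neg (by omega),
        List.getElem?_eq_getElem hixs]
    rw [hstep _ _ _ hS]
    have hMi : M[i]? = some (if q i xs[i] then 2 else xs[i]) := hM i hixs hin
    by_cases hq : q i xs[i] = true
    · rw [if_pos hq, PySem.List.pySetD_natCast, takeDrop_set M xs hlen i hixs,
        takeDrop_shift M xs i (by omega) 2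
          (by have := List.getElem?_eq_getElem (l := M) (i := i) (by omega)
              rw [this] at hMi
              simpa [hq] using hMi)]
      have := ih (i + 1) (by push_cast; omega)
      push_cast at this ⊢
      exact this
    · rw [if_neg hq]
      have hrw : M.take i ++ xs.drop i = M.take (i + 1) ++ xs.drop (i + 1) := by
        rw [List.drop_eq_getElem_cons hixs]
        exact takeDrop_shift M xs i (by omega) xs[i]
          (by have := List.getElem?_eq_getElem (l := M) (i := i) (by omega)
              rw [this] at hMi
              simpa [hq] using hMi)
      rw [hrw]
      have := ih (i + 1) (by push_cast; omega)
      push_cast at this ⊢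
      exact this

theorem foldl_selfwrite (n : Int) (xs M : List Int) (q : Int → Int → Bool)
    (step : List Int → Int → List Int)
    (hstep : ∀ (r : List Int) (i : Int) (v : Int), PySem.List.pyGet? r i = some v →
      step r i = if q i v then PySem.List.pySetD r i 2 else r)
    (hn : 0 ≤ n) (hle : n ≤ (xs.length : Int)) (hlen : M.length = xs.length)
    (hM : ∀ (j : Nat) (hj : j < xs.length), (j : Int) < n → M[j]? = some (if q (j : Int) (xs[j]'hj) then 2 else xs[j]'hj))
    (hM2 : ∀ j : Nat, n ≤ (j : Int) → M[j]? = xs[j]?) :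
    (PySem.List.pyRange 0 n 1).foldl step xs = M := by
  have := foldl_selfwrite_aux n xs M q step hstep hle hlen hM hM2 n.toNat 0
    (by omega)
  simpa using this

theorem takeDrop_step {α : Type} (A B : List α) (hlen : A.length = B.length) (i : Nat)
    (hi : i < B.length) (h : A[i]? = B[i]?) :
    A.take i ++ B.drop i = A.take (i + 1) ++ B.drop (i + 1) := by
  rw [List.drop_eq_getElem_cons hi]
  apply takeDrop_shift A B i (by omega)
  have h1 := List.getElem?_eq_getElem (l := A) (i := i) (by omega)
  have h2 := List.getElem?_eq_getElem (l := B) (i := i) hi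
  rw [h1, h2] at h
  exact Option.some.inj h

theorem takeDrop_set_last {α : Type} (A B : List α) (i : Nat)
    (hi : i < A.length) (v : α) :
    (A.take (i + 1) ++ B.drop (i + 1)).set i v = A.take i ++ v :: B.drop (i + 1) := by
  have h1 : (A.take (i + 1)).set i v = A.take i ++ [v] := by
    rw [List.take_add_one, List.getElem?_eq_getElem hi, List.set_append,
      if_neg (by simp)]
    have h0 : i - (List.take i A).length = 0 := by simp; omega
    rw [h0]
    rfl
  rw [List.set_append, if_pos (by simp; omega), h1]
  simp

-- the first-row coloring sweep is a map
theorem rowCol_eq (xs : List Int) :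
    rowCol xs = xs.map (fun v => if v = 1 then 2 else v) := by
  unfold rowCol
  apply foldl_selfwrite (xs.length : Int) xs _ (fun _ v => decide (v = 1)) _ ?hstep
    (by positivity) le_rfl (by simp) ?hM ?hM2
  case hstep =>
    intro r i v hv
    rw [hv]
    by_cases h : v = 1 <;> simp [h]
  case hM =>
    intro j hj hjn
    rw [List.getElem?_map, List.getElem?_eq_getElem hj]
    by_cases h : xs[j] = 1 <;> simp [h]
  case hM2 =>
    intro j hjn
    have hj : xs.length ≤ j := by omega
    rw [List.getElem?_eq_none hj, List.getElem?_eq_none (by simpa using hj)]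

-- the downward sweep is altDown
theorem rowDown_eq (n : Int) (hn : 0 ≤ n) (p xs : List Int) (hle : n ≤ (xs.length : Int)) :
    rowDown n p xs = altDown n p xs := by
  unfold rowDown
  apply foldl_selfwrite n xs _
    (fun i v => decide (PySem.List.pyGet? p i = some 2 ∧ v = 1)) _ ?hstep
    hn hle (length_altDown n p xs) ?hM ?hM2
  case hstep =>
    intro r i v hv
    rw [hv]
    by_cases h : PySem.List.pyGet? p i = some 2 ∧ v = 1 <;> simp [h]
  case hM =>
    intro j hj hjn
    rw [altDown_get, List.getElem?_eq_getElem hj]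
    by_cases h : PySem.List.pyGet? p (j : Int) = some 2 ∧ xs[j] = 1
    · simp [h, hjn]
    · rcases Decidable.not_and_iff_not_or_not.mp h with h' | h' <;> simp [h', hjn]
  case hM2 =>
    intro j hjn
    rw [altDown_get]
    have : ¬ ((j : Int) < n) := by omega
    cases xs[j]? <;> simp [this]

-- the rightward sweep is the forward flag scan
theorem altFwd_zero_get (n : Int) (xs : List Int) :
    (altFwd n false 0 xs)[0]? = xs[0]? := by
  match xs with
  | [] => rfl
  | v :: t => rw [altFwd_head]; simp

theorem altFwd_zero_succ (n : Int) (xs : List Int) (j : Nat) :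
    (altFwd n false 0 xs)[j + 1]? = xs[j + 1]?.map (fun v =>
      if v = 1 ∧ (altFwd n false 0 xs)[j]? = some 2 ∧ (j : Int) < n then 2 else v) := by
  have := altFwd_get_succ n j false 0 xs
  simpa using this

theorem altFwd_zero_high (n : Int) (xs : List Int) (j : Nat) (hj : n ≤ (j : Int)) :
    (altFwd n false 0 xs)[j + 1]? = xs[j + 1]? := by
  rw [altFwd_zero_succ]
  have : ¬ ((j : Int) < n) := by omega
  cases xs[j + 1]? <;> simp [this]

theorem rowRight_eq_aux (n : Int) (xs : List Int) (hle : n ≤ (xs.length : Int)) :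
    ∀ (d i : Nat), (i : Int) + d = n →
      (PySem.List.pyRange (i : Int) n 1).foldl
        (fun r i => if PySem.List.pyGet? r i = some 2 ∧ ¬ i = (r.length : Int) - 1 ∧ PySem.List.pyGet? r (i + 1) = some 1
          then PySem.List.pySetD r (i + 1) 2 else r)
        ((altFwd n false 0 xs).take (i + 1) ++ xs.drop (i + 1)) = altFwd n false 0 xs := by
  have hFlen : (altFwd n false 0 xs).length = xs.length := length_altFwd n false 0 xs
  intro d
  induction d with
  | zero =>
    intro i hi
    rw [PySem.List.pyRange_one_eq_nil (by omega), List.foldl_nil]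
    have hdrop : xs.drop (i + 1) = (altFwd n false 0 xs).drop (i + 1) := by
      apply List.ext_getElem?
      intro t
      rw [List.getElem?_drop, List.getElem?_drop]
      have : i + 1 + t = (i + t) + 1 := by omega
      rw [this, altFwd_zero_high n xs (i + t) (by push_cast; omega)]
    rw [hdrop, List.take_append_drop]
  | succ d ih =>
    intro i hi
    have hin : (i : Int) < n := by omega
    have hixs : i < xs.length := by omega
    rw [PySem.List.pyRange_one_cons hin, List.foldl_cons]
    set F := altFwd n false 0 xs with hF
    have hSlen : (F.take (i + 1) ++ xs.drop (i + 1)).length = xs.length := by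
      simp; omega
    have hSi : PySem.List.pyGet? (F.take (i + 1) ++ xs.drop (i + 1)) (i : Int) = F[i]? := by
      rw [PySem.List.pyGet?_natCast, takeDrop_getElem? F xs hFlen, if_pos (by omega)]
    rcases Nat.lt_or_ge (i + 1) xs.length with hi1 | hi1
    · -- interior step: the write lands on cell i+1
      have hSi1 : PySem.List.pyGet? (F.take (i + 1) ++ xs.drop (i + 1)) ((i : Int) + 1)
          = some xs[i + 1] := by
        have hcast : (i : Int) + 1 = ((i + 1 : Nat) : Int) := by push_cast; ring
        rw [hcast, PySem.List.pyGet?_natCast, takeDrop_getElem? F xs hFlen,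
          if_neg (by omega), List.getElem?_eq_getElem hi1]
      have hFi1 : F[i + 1]? = some (if xs[i + 1] = 1 ∧ F[i]? = some 2 ∧ (i : Int) < n
          then 2 else xs[i + 1]) := by
        rw [altFwd_zero_succ, List.getElem?_eq_getElem hi1]
        rfl
      have hmid : ¬ ((i : Int) = ((F.take (i + 1) ++ xs.drop (i + 1)).length : Int) - 1) := by
        rw [hSlen]; omega
      by_cases hc : F[i]? = some 2 ∧ xs[i + 1] = 1
      · rw [if_pos (by rw [hSi, hSi1]; exact ⟨hc.1, hmid, by rw [hc.2]⟩)]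
        have hcast : (i : Int) + 1 = ((i + 1 : Nat) : Int) := by push_cast; ring
        rw [hcast, PySem.List.pySetD_natCast, takeDrop_set F xs hFlen (i + 1) hi1,
          takeDrop_shift F xs (i + 1) (by omega) 2
            (by have := List.getElem?_eq_getElem (l := F) (i := i + 1) (by omega)
                rw [this] at hFi1
                have : F[i + 1] = (if xs[i + 1] = 1 ∧ F[i]? = some 2 ∧ (i : Int) < n then 2 else xs[i + 1]) :=
                  Option.some.inj hFi1
                rw [this, if_pos ⟨hc.2, hc.1, hin⟩])]
        have := ih (i + 1) (by push_cast; omega)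
        push_cast at this ⊢
        exact this
      · rw [if_neg (by rw [hSi, hSi1]
                       rintro ⟨h1, -, h3⟩
                       exact hc ⟨h1, Option.some.inj h3⟩)]
        have hstep : F.take (i + 1) ++ xs.drop (i + 1) = F.take (i + 2) ++ xs.drop (i + 2) := by
          apply takeDrop_step F xs hFlen (i + 1) hi1
          rw [hFi1, List.getElem?_eq_getElem hi1, if_neg (by rintro ⟨h1, h2, -⟩; exact hc ⟨h2, h1⟩)]
        rw [hstep]
        have := ih (i + 1) (by push_cast; omega)
        push_cast at this ⊢
        exact this
    · -- boundary: i + 1 = len, the guard `abscisse == len-1` blocks the write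
      have hieq : i + 1 = xs.length := by omega
      rw [if_neg (by rintro ⟨-, h2, -⟩; exact h2 (by rw [hSlen]; omega))]
      have h1 : F.take (i + 1) ++ xs.drop (i + 1) = F.take (i + 2) ++ xs.drop (i + 2) := by
        rw [List.take_of_length_le (by omega), List.take_of_length_le (by omega),
          List.drop_eq_nil_of_le (by omega), List.drop_eq_nil_of_le (by omega)]
      rw [h1]
      have := ih (i + 1) (by push_cast; omega)
      push_cast at this ⊢
      exact this

theorem rowRight_eq (n : Int) (hn : 0 < n) (xs : List Int) (hle : n ≤ (xs.length : Int)) :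
    rowRight n xs = altFwd n false 0 xs := by
  have hFlen : (altFwd n false 0 xs).length = xs.length := length_altFwd n false 0 xs
  have hstart : xs = (altFwd n false 0 xs).take 1 ++ xs.drop 1 := by
    apply List.ext_getElem?
    intro j
    rw [takeDrop_getElem? _ xs hFlen]
    match j with
    | 0 => rw [if_pos (by omega), altFwd_zero_get]
    | j + 1 => rw [if_neg (by omega)]
  unfold rowRight
  conv_lhs => rw [hstart]
  have := rowRight_eq_aux n xs hle n.toNat 0 (by omega)
  simpa using this

-- the leftward sweep is the backward flag scan (on the reversed row)
theorem altG_len (n : Int) (xs : List Int) :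
    ((altBwd n false ((xs.length : Int) - 1) xs.reverse).reverse).length = xs.length := by
  simp [length_altBwd]

theorem altG_get_rev (n : Int) (xs : List Int) (j : Nat) (hj : j < xs.length) :
    ((altBwd n false ((xs.length : Int) - 1) xs.reverse).reverse)[j]?
      = (altBwd n false ((xs.length : Int) - 1) xs.reverse)[xs.length - 1 - j]? := by
  have hlen : (altBwd n false ((xs.length : Int) - 1) xs.reverse).length = xs.length := by
    simp [length_altBwd]
  rw [List.getElem?_reverse (by omega), hlen]

theorem altG_last (n : Int) (xs : List Int) (h0 : 0 < xs.length) :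
    ((altBwd n false ((xs.length : Int) - 1) xs.reverse).reverse)[xs.length - 1]? = xs[xs.length - 1]? := by
  rw [altG_get_rev n xs _ (by omega)]
  have h : xs.length - 1 - (xs.length - 1) = 0 := by omega
  rw [h]
  have hrev : 0 < xs.reverse.length := by simpa using h0
  match hx : xs.reverse with
  | [] => rw [hx] at hrev; simp at hrev
  | v :: t =>
    rw [altBwd_head]
    have hv : xs.reverse[0]? = some v := by rw [hx]; rfl
    rw [List.getElem?_reverse (by omega)] at hv
    simp only [Nat.sub_zero] at hv
    rw [hv]
    simp

theorem altG_form (n : Int) (xs : List Int) (j : Nat) (hj : j + 1 < xs.length) :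
    ((altBwd n false ((xs.length : Int) - 1) xs.reverse).reverse)[j]?
      = xs[j]?.map (fun v =>
        if v = 1 ∧ ((altBwd n false ((xs.length : Int) - 1) xs.reverse).reverse)[j + 1]? = some 2 ∧ (j : Int) + 1 < n
        then 2 else v) := by
  have hk : xs.length - 1 - j = (xs.length - 2 - j) + 1 := by omega
  rw [altG_get_rev n xs j (by omega), hk, altBwd_get_succ]
  have h1 : xs.reverse[(xs.length - 2 - j) + 1]? = xs[j]? := by
    have hrl : xs.length - 2 - j + 1 < xs.reverse.length := by
      rw [List.length_reverse]; omega
    rw [List.getElem?_reverse (l := xs) (by omega)]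
    have hidx : xs.length - 1 - (xs.length - 2 - j + 1) = j := by omega
    rw [hidx]
  have h2 : (altBwd n false ((xs.length : Int) - 1) xs.reverse)[xs.length - 2 - j]?
      = ((altBwd n false ((xs.length : Int) - 1) xs.reverse).reverse)[j + 1]? := by
    rw [altG_get_rev n xs (j + 1) hj]
    have hidx2 : xs.length - 2 - j = xs.length - 1 - (j + 1) := by omega
    rw [hidx2]
  rw [h1, h2]
  have hidx3 : (xs.length : Int) - 1 - ((xs.length - 2 - j : Nat) : Int) = (j : Int) + 1 := by
    omega
  rw [hidx3]

theorem altG_high (n : Int) (xs : List Int) (j : Nat) (hj : j < xs.length)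
    (hjn : n - 1 ≤ (j : Int)) :
    ((altBwd n false ((xs.length : Int) - 1) xs.reverse).reverse)[j]? = xs[j]? := by
  rcases Nat.lt_or_ge (j + 1) xs.length with h | h
  · rw [altG_form n xs j h]
    have : ¬ ((j : Int) + 1 < n) := by omega
    cases xs[j]? <;> simp [this]
  · have hje : j = xs.length - 1 := by omega
    rw [hje]
    exact altG_last n xs (by omega)

-- abstract version: any G matching the backward-scan recurrence is computed by the left sweep
theorem rowLeft_eq_aux (n : Int) (xs G : List Int) (hle : n ≤ (xs.length : Int))
    (hGlen : G.length = xs.length)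
    (hGform : ∀ j : Nat, j + 1 < xs.length → G[j]? = xs[j]?.map (fun v =>
      if v = 1 ∧ G[j + 1]? = some 2 ∧ (j : Int) + 1 < n then 2 else v)) :
    ∀ (i : Nat), (i : Int) ≤ n - 1 →
      (PySem.List.pyRange (i : Int) (-1) (-1)).foldl
        (fun r i => if PySem.List.pyGet? r i = some 2 ∧ ¬ i = 0 ∧ PySem.List.pyGet? r (i - 1) = some 1
          then PySem.List.pySetD r (i - 1) 2 else r)
        (xs.take i ++ G.drop i) = G := by
  intro i
  induction i with
  | zero =>
    intro _
    rw [show ((0 : Nat) : Int) = 0 from rfl, PySem.List.pyRange_neg_one_cons (by omega),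
      PySem.List.pyRange_neg_one_eq_nil (by omega), List.foldl_cons, List.foldl_nil]
    rw [if_neg (by rintro ⟨-, h2, -⟩; exact h2 rfl)]
    simp
  | succ i ih =>
    intro hi1
    have hilen : i + 1 < xs.length := by omega
    rw [show ((i + 1 : Nat) : Int) = (i : Int) + 1 by omega,
      PySem.List.pyRange_neg_one_cons (by omega), List.foldl_cons,
      show (i : Int) + 1 - 1 = ((i : Nat) : Int) by omega]
    have hSG : PySem.List.pyGet? (xs.take (i + 1) ++ G.drop (i + 1)) ((i : Int) + 1) = G[i + 1]? := by
      rw [show (i : Int) + 1 = ((i + 1 : Nat) : Int) by push_cast; ring,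
        PySem.List.pyGet?_natCast, takeDrop_getElem? xs G hGlen.symm, if_neg (by omega)]
    have hSx : PySem.List.pyGet? (xs.take (i + 1) ++ G.drop (i + 1)) ((i : Nat) : Int) = some xs[i] := by
      rw [PySem.List.pyGet?_natCast, takeDrop_getElem? xs G hGlen.symm, if_pos (by omega),
        List.getElem?_eq_getElem (by omega)]
    have hGi : G[i]? = some (if xs[i] = 1 ∧ G[i + 1]? = some 2 ∧ (i : Int) + 1 < n then 2 else xs[i]) := by
      have hx : xs[i]? = some xs[i] := List.getElem?_eq_getElem (by omega)
      rw [hGform i hilen, hx]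
      rfl
    by_cases hc : G[i + 1]? = some 2 ∧ xs[i] = 1
    · rw [if_pos (by rw [hSG, hSx]; exact ⟨hc.1, by omega, by rw [hc.2]⟩)]
      rw [PySem.List.pySetD_natCast, takeDrop_set_last xs G i (by omega) 2]
      have hG2 : G.drop i = 2 :: G.drop (i + 1) := by
        rw [List.drop_eq_getElem_cons (by omega)]
        congr 1
        have h := List.getElem?_eq_getElem (l := G) (i := i) (by omega)
        rw [h] at hGi
        have h2 := Option.some.inj hGi
        rw [h2, if_pos ⟨hc.2, hc.1, by omega⟩]
      rw [← hG2]
      exact ih (by omega)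
    · rw [if_neg (by rw [hSG, hSx]
                     rintro ⟨h1, -, h3⟩
                     exact hc ⟨h1, Option.some.inj h3⟩)]
      have hstep : xs.take (i + 1) ++ G.drop (i + 1) = xs.take i ++ G.drop i := by
        refine (takeDrop_step xs G hGlen.symm i (by omega) ?_).symm
        rw [hGi, List.getElem?_eq_getElem (by omega),
          if_neg (by rintro ⟨h1, h2, -⟩; exact hc ⟨h2, h1⟩)]
      rw [hstep]
      exact ih (by omega)

theorem rowLeft_eq (n : Int) (hn : 0 < n) (xs : List Int) (hle : n ≤ (xs.length : Int)) :
    rowLeft n xs = (altBwd n false ((xs.length : Int) - 1) xs.reverse).reverse := by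
  set G := (altBwd n false ((xs.length : Int) - 1) xs.reverse).reverse with hGdef
  have hGlen : G.length = xs.length := altG_len n xs
  have hGform : ∀ j : Nat, j + 1 < xs.length → G[j]? = xs[j]?.map (fun v =>
      if v = 1 ∧ G[j + 1]? = some 2 ∧ (j : Int) + 1 < n then 2 else v) := by
    intro j hj
    rw [hGdef]
    exact altG_form n xs j hj
  have hstart : xs = xs.take ((n - 1).toNat) ++ G.drop ((n - 1).toNat) := by
    apply List.ext_getElem?
    intro j
    rw [takeDrop_getElem? xs G hGlen.symm]
    split
    · rfl
    · next hj =>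
      rcases Nat.lt_or_ge j xs.length with hjl | hjl
      · rw [hGdef]
        exact (altG_high n xs j hjl (by omega)).symm
      · rw [List.getElem?_eq_none hjl, List.getElem?_eq_none (by omega)]
  unfold rowLeft
  conv_lhs => rw [hstart]
  have := rowLeft_eq_aux n xs G hle hGlen hGform (n - 1).toNat (by omega)
  rw [show (((n - 1).toNat : Nat) : Int) = n - 1 by omega] at this
  exact this

theorem set_getD_self (g : List (List Int)) (K : Nat) (hK : K < g.length) :
    g.set K (g[K]?.getD []) = g := by
  rw [List.getElem?_eq_getElem hK]
  simp

theorem pySetD_zero (g : List (List Int)) (x : List Int) :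
    PySem.List.pySetD g 0 x = g.set 0 x := by
  simp only [PySem.List.pySetD, PySem.List.pySet?, PySem.List.pyIdx?]
  split
  · split
    · rfl
    · next h => rw [List.set_eq_of_length_le (by omega)]; rfl
  · next h => omega

-- the first-line coloring, lifted
theorem colorier_full (g : List (List Int)) (hg : g ≠ []) :
    colorierLigne1 g = g.set 0 ((g.headD []).map (fun v => if v = 1 then 2 else v)) := by
  have h0 : 0 < g.length := List.length_pos_iff.mpr hg
  have hhead : g[0]?.getD [] = g.headD [] := by
    match g with
    | r :: t => rfl
  have h : ∀ (g' : List (List Int)) (i : Int),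
      i ∈ PySem.List.pyRange 0 ((((PySem.List.pyGet? g 0).getD []).length : Int)) 1 →
      g'.length = g.length → (∀ j : Nat, j ≠ 0 → g'[j]? = g[j]?) →
      (if trouverCouleurCase 0 i g' = some 1 then setCell g' 0 i 2 else g')
        = g'.set 0 ((if PySem.List.pyGet? (g'[0]?.getD []) i = some 1
            then PySem.List.pySetD (g'[0]?.getD []) i 2 else g'[0]?.getD [])) := by
    intro g' i _ hlen hne
    have h0' : 0 < g'.length := by omega
    have hg0 : PySem.List.pyGet? g' 0 = some (g'[0]?.getD []) := by
      rw [PySem.List.pyGet?_zero, List.getElem?_eq_getElem h0']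
      rfl
    unfold trouverCouleurCase setCell
    rw [hg0]
    simp only [Option.bind_some, Option.getD_some]
    split
    · rw [pySetD_zero]
    · exact (set_getD_self g' 0 h0').symm
  have H := foldl_rows (K := 0) (g := g) h0
    (fun g' i => if trouverCouleurCase 0 i g' = some 1 then setCell g' 0 i 2 else g')
    (fun r i => if PySem.List.pyGet? r i = some 1 then PySem.List.pySetD r i 2 else r)
    (PySem.List.pyRange 0 ((((PySem.List.pyGet? g 0).getD []).length : Int)) 1) h
  unfold colorierLigne1
  rw [H, hhead]
  congr 1
  rw [← rowCol_eq]
  unfold rowCol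
  rw [PySem.List.pyGet?_zero, hhead]

-- the three inner sweeps of A's loop body, lifted to row level
theorem lift_down (n : Int) (g : List (List Int)) (m : Nat)
    (hm : (m : Int) + 1 < n) (hgl : n ≤ (g.length : Int)) :
    (PySem.List.pyRange 0 n 1).foldl (fun gg i =>
      if trouverCouleurCase (m : Int) i gg = some 2 ∧ couleurCaseDessous (m : Int) i gg = some 1
      then setCell gg ((m : Int) + 1) i 2 else gg) g
    = g.set (m + 1) (rowDown n (g[m]?.getD []) (g[m + 1]?.getD [])) := by
  have hK : m + 1 < g.length := by omega
  have h : ∀ (g' : List (List Int)) (i : Int), i ∈ PySem.List.pyRange 0 n 1 →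
      g'.length = g.length → (∀ j : Nat, j ≠ m + 1 → g'[j]? = g[j]?) →
      (if trouverCouleurCase (m : Int) i g' = some 2 ∧ couleurCaseDessous (m : Int) i g' = some 1
        then setCell g' ((m : Int) + 1) i 2 else g')
      = g'.set (m + 1) ((fun r i => if PySem.List.pyGet? (g[m]?.getD []) i = some 2 ∧ PySem.List.pyGet? r i = some 1
          then PySem.List.pySetD r i 2 else r) (g'[m + 1]?.getD []) i) := by
    intro g' i _ hlen hne
    have hK' : m + 1 < g'.length := by omega
    have hr : PySem.List.pyGet? g' ((m : Int) + 1) = some (g'[m + 1]?.getD []) := by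
      rw [show (m : Int) + 1 = ((m + 1 : Nat) : Int) by push_cast; ring,
        PySem.List.pyGet?_natCast, List.getElem?_eq_getElem hK']
      rfl
    have hpget : PySem.List.pyGet? g' (m : Int) = some (g[m]?.getD []) := by
      rw [PySem.List.pyGet?_natCast, hne m (by omega),
        List.getElem?_eq_getElem (by omega : m < g.length)]
      rfl
    unfold trouverCouleurCase couleurCaseDessous setCell
    rw [hpget, hr]
    simp only [Option.bind_some, Option.getD_some]
    have hnb : ¬ ((m : Int) = ((g'.length : Int)) - 1) := by rw [hlen]; omega
    rw [if_neg hnb]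
    split
    · rw [show (m : Int) + 1 = ((m + 1 : Nat) : Int) by push_cast; ring,
        PySem.List.pySetD_natCast]
    · exact (set_getD_self g' (m + 1) hK').symm
  exact foldl_rows (K := m + 1) hK _ _ _ h

theorem lift_right (n : Int) (g : List (List Int)) (K : Nat) (hK : K < g.length) :
    (PySem.List.pyRange 0 n 1).foldl (fun gg i =>
      if trouverCouleurCase ((K : Nat) : Int) i gg = some 2 ∧ couleurCaseDroite ((K : Nat) : Int) i gg = some 1
      then setCell gg ((K : Nat) : Int) (i + 1) 2 else gg) g
    = g.set K (rowRight n (g[K]?.getD [])) := by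
  have h : ∀ (g' : List (List Int)) (i : Int), i ∈ PySem.List.pyRange 0 n 1 →
      g'.length = g.length → (∀ j : Nat, j ≠ K → g'[j]? = g[j]?) →
      (if trouverCouleurCase ((K : Nat) : Int) i g' = some 2 ∧ couleurCaseDroite ((K : Nat) : Int) i g' = some 1
        then setCell g' ((K : Nat) : Int) (i + 1) 2 else g')
      = g'.set K ((fun r i => if PySem.List.pyGet? r i = some 2 ∧ ¬ i = (r.length : Int) - 1 ∧ PySem.List.pyGet? r (i + 1) = some 1
          then PySem.List.pySetD r (i + 1) 2 else r) (g'[K]?.getD []) i) := by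
    intro g' i _ hlen hne
    have hK' : K < g'.length := by omega
    have hr : PySem.List.pyGet? g' ((K : Nat) : Int) = some (g'[K]?.getD []) := by
      rw [PySem.List.pyGet?_natCast, List.getElem?_eq_getElem hK']
      rfl
    unfold trouverCouleurCase couleurCaseDroite setCell
    rw [hr]
    simp only [Option.bind_some, Option.getD_some]
    by_cases hb : i = (((g'[K]?.getD []).length : Int) - 1)
    · rw [if_pos hb,
        if_neg (by rintro ⟨-, h2⟩; exact (by simp at h2 : False)),
        if_neg (by rintro ⟨-, h2, -⟩; exact h2 hb)]
      exact (set_getD_self g' K hK').symm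
    · rw [if_neg hb]
      by_cases hc : PySem.List.pyGet? (g'[K]?.getD []) i = some 2 ∧
          PySem.List.pyGet? (g'[K]?.getD []) (i + 1) = some 1
      · rw [if_pos hc, if_pos ⟨hc.1, hb, hc.2⟩, PySem.List.pySetD_natCast]
      · rw [if_neg hc, if_neg (by rintro ⟨h1, -, h3⟩; exact hc ⟨h1, h3⟩)]
        exact (set_getD_self g' K hK').symm
  exact foldl_rows (K := K) hK _ _ _ h

theorem lift_left (n : Int) (g : List (List Int)) (K : Nat) (hK : K < g.length) :
    (PySem.List.pyRange (n - 1) (-1) (-1)).foldl (fun gg i =>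
      if trouverCouleurCase ((K : Nat) : Int) i gg = some 2 ∧ couleurCaseGauche ((K : Nat) : Int) i gg = some 1
      then setCell gg ((K : Nat) : Int) (i - 1) 2 else gg) g
    = g.set K (rowLeft n (g[K]?.getD [])) := by
  have h : ∀ (g' : List (List Int)) (i : Int), i ∈ PySem.List.pyRange (n - 1) (-1) (-1) →
      g'.length = g.length → (∀ j : Nat, j ≠ K → g'[j]? = g[j]?) →
      (if trouverCouleurCase ((K : Nat) : Int) i g' = some 2 ∧ couleurCaseGauche ((K : Nat) : Int) i g' = some 1
        then setCell g' ((K : Nat) : Int) (i - 1) 2 else g')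
      = g'.set K ((fun r i => if PySem.List.pyGet? r i = some 2 ∧ ¬ i = 0 ∧ PySem.List.pyGet? r (i - 1) = some 1
          then PySem.List.pySetD r (i - 1) 2 else r) (g'[K]?.getD []) i) := by
    intro g' i _ hlen hne
    have hK' : K < g'.length := by omega
    have hr : PySem.List.pyGet? g' ((K : Nat) : Int) = some (g'[K]?.getD []) := by
      rw [PySem.List.pyGet?_natCast, List.getElem?_eq_getElem hK']
      rfl
    unfold trouverCouleurCase couleurCaseGauche setCell
    rw [hr]
    simp only [Option.bind_some, Option.getD_some]
    by_cases hb : i = (0 : Int)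
    · rw [if_pos hb,
        if_neg (by rintro ⟨-, h2⟩; exact (by simp at h2 : False)),
        if_neg (by rintro ⟨-, h2, -⟩; exact h2 hb)]
      exact (set_getD_self g' K hK').symm
    · rw [if_neg hb]
      by_cases hc : PySem.List.pyGet? (g'[K]?.getD []) i = some 2 ∧
          PySem.List.pyGet? (g'[K]?.getD []) (i - 1) = some 1
      · rw [if_pos hc, if_pos ⟨hc.1, hb, hc.2⟩, PySem.List.pySetD_natCast]
      · rw [if_neg hc, if_neg (by rintro ⟨h1, -, h3⟩; exact hc ⟨h1, h3⟩)]
        exact (set_getD_self g' K hK').symm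
  exact foldl_rows (K := K) hK _ _ _ h

-- the loop bodies of the two ports, named
def stepAfun (n : Int) : List (List Int) → Int → List (List Int) := fun g k =>
  let g1 := (PySem.List.pyRange 0 n 1).foldl (fun g i =>
    if trouverCouleurCase k i g = some 2 ∧ couleurCaseDessous k i g = some 1
    then setCell g (k + 1) i 2 else g) g
  let g2 := (PySem.List.pyRange 0 n 1).foldl (fun g i =>
    if trouverCouleurCase (k + 1) i g = some 2 ∧ couleurCaseDroite (k + 1) i g = some 1
    then setCell g (k + 1) (i + 1) 2 else g) g1
  (PySem.List.pyRange (n - 1) (-1) (-1)).foldl (fun g i =>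
    if trouverCouleurCase (k + 1) i g = some 2 ∧ couleurCaseGauche (k + 1) i g = some 1
    then setCell g (k + 1) (i - 1) 2 else g) g2

def stepBfun (n : Int) : List (List Int) → Int → List (List Int) := fun g r =>
  g.set r.toNat (fillRow ((PySem.List.pyGet? g (r - 1)).getD [])
    ((PySem.List.pyGet? g r).getD []) 0)

theorem ecoulement_fold (g : List (List Int)) (n : Int) :
    ecoulement g n = (PySem.List.pyRange 0 (n - 1) 1).foldl (stepAfun n) (colorierLigne1 g) := rfl

theorem ecoulement_alt_fold (g : List (List Int)) (n : Int) :
    ecoulement_alt g n = (PySem.List.pyRange 1 n 1).foldl (stepBfun n)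
      (g.set 0 ((g.headD []).map (fun v => if v = 1 then 2 else v))) := rfl

theorem length_altRow (n : Int) (p c : List Int) : (altRow n p c).length = c.length := by
  unfold altRow
  simp [length_altBwd, length_altFwd, length_altDown]

-- shape invariant carried around A's outer loop
def InvG (n : Int) (g : List (List Int)) : Prop :=
  n ≤ (g.length : Int) ∧ ∀ j : Nat, (j : Int) < n → n ≤ ((g[j]?.getD []).length : Int)

-- one outer iteration of A equals one row update with the pipeline
theorem step_eq (n : Int) (g : List (List Int)) (m : Nat)
    (hm : (m : Int) + 1 < n) (hInv : InvG n g) :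
    stepAfun n g (m : Int)
      = g.set (m + 1) (altRow n (g[m]?.getD []) (g[m + 1]?.getD [])) := by
  obtain ⟨hgl, hrows⟩ := hInv
  have hK : m + 1 < g.length := by omega
  have hcast : (m : Int) + 1 = ((m + 1 : Nat) : Int) := by push_cast; ring
  show (PySem.List.pyRange (n - 1) (-1) (-1)).foldl _
    ((PySem.List.pyRange 0 n 1).foldl _
      ((PySem.List.pyRange 0 n 1).foldl _ g)) = _
  rw [lift_down n g m hm hgl]
  rw [hcast, lift_right n _ (m + 1) (by simpa using hK)]
  have e0 : (g.set (m + 1) (rowDown n (g[m]?.getD []) (g[m + 1]?.getD [])))[m + 1]?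
      = some (rowDown n (g[m]?.getD []) (g[m + 1]?.getD [])) :=
    List.getElem?_set_self (by simpa using hK)
  rw [e0, Option.getD_some, List.set_set]
  rw [lift_left n _ (m + 1) (by simpa using hK)]
  have e1 : (g.set (m + 1) (rowRight n (rowDown n (g[m]?.getD []) (g[m + 1]?.getD []))))[m + 1]?
      = some (rowRight n (rowDown n (g[m]?.getD []) (g[m + 1]?.getD []))) :=
    List.getElem?_set_self (by simpa using hK)
  rw [e1, Option.getD_some, List.set_set]
  congr 1
  have hplen : m + 1 < g.length := hK
  have hc : n ≤ ((g[m + 1]?.getD []).length : Int) := hrows (m + 1) (by push_cast; omega)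
  rw [rowDown_eq n (by omega) _ _ hc]
  have hcd : n ≤ ((altDown n (g[m]?.getD []) (g[m + 1]?.getD [])).length : Int) := by
    rw [length_altDown]; exact hc
  rw [rowRight_eq n (by omega) _ hcd]
  have hcf : n ≤ ((altFwd n false 0 (altDown n (g[m]?.getD []) (g[m + 1]?.getD []))).length : Int) := by
    rw [length_altFwd, length_altDown]; exact hc
  rw [rowLeft_eq n (by omega) _ hcf]
  rfl

theorem stepB_at (n : Int) (g : List (List Int)) (m : Nat) :
    stepBfun n g ((m : Int) + 1)
      = g.set (m + 1) (fillRow (g[m]?.getD []) (g[m + 1]?.getD []) 0) := by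
  unfold stepBfun
  have h1 : ((m : Int) + 1).toNat = m + 1 := by omega
  have h2 : (m : Int) + 1 - 1 = ((m : Nat) : Int) := by ring
  rw [h1, h2, PySem.List.pyGet?_natCast,
    show (m : Int) + 1 = ((m + 1 : Nat) : Int) by push_cast; ring, PySem.List.pyGet?_natCast]

theorem inv_step (n : Int) (g : List (List Int)) (m : Nat)
    (hm : (m : Int) + 1 < n) (hInv : InvG n g) :
    InvG n (g.set (m + 1) (altRow n (g[m]?.getD []) (g[m + 1]?.getD []))) := by
  obtain ⟨hgl, hrows⟩ := hInv
  constructor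
  · simpa using hgl
  · intro j hj
    by_cases hjm : j = m + 1
    · subst hjm
      rw [List.getElem?_set_self (by omega), Option.getD_some, length_altRow]
      exact hrows (m + 1) hj
    · rw [List.getElem?_set_ne (by omega)]
      exact hrows j hj

-- ================== B's run flood equals the pipeline, one row ==================

-- runEnd's unfolding equation (the fuel is irrelevant once sufficient)
theorem runEndF_congr (row : List Int) :
    ∀ f1 f2 d, row.length - d ≤ f1 → row.length - d ≤ f2 →
      runEndF row f1 d = runEndF row f2 d := by
  intro f1
  induction f1 with
  | zero =>
    intro f2 d h1 h2
    cases f2 with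
    | zero => rfl
    | succ f2 =>
      simp only [runEndF]
      rw [if_neg (by rintro ⟨h, -⟩; omega)]
  | succ f1 ih =>
    intro f2 d h1 h2
    cases f2 with
    | zero =>
      simp only [runEndF]
      rw [if_neg (by rintro ⟨h, -⟩; omega)]
    | succ f2 =>
      simp only [runEndF]
      by_cases hc : d < row.length ∧ row[d]? = some 1
      · rw [if_pos hc, if_pos hc]
        exact ih f2 (d + 1) (by omega) (by omega)
      · rw [if_neg hc, if_neg hc]

theorem runEnd_eq (row : List Int) (d : Nat) :
    runEnd row d = if d < row.length ∧ row[d]? = some 1 then runEnd row (d + 1) else d := by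
  unfold runEnd
  by_cases hc : d < row.length ∧ row[d]? = some 1
  · rw [if_pos hc]
    obtain ⟨f, hf⟩ : ∃ f, row.length - d = f + 1 := ⟨row.length - d - 1, by omega⟩
    rw [hf]
    simp only [runEndF]
    rw [if_pos hc]
    exact runEndF_congr row f (row.length - (d + 1)) (d + 1) (by omega) (by omega)
  · rw [if_neg hc]
    cases hf : row.length - d with
    | zero => rfl
    | succ f =>
      simp only [runEndF]
      rw [if_neg hc]

theorem le_runEnd (row : List Int) (d : Nat) : d ≤ runEnd row d := by
  have key : ∀ k d, row.length - d ≤ k → d ≤ runEnd row d := by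
    intro k
    induction k with
    | zero =>
      intro d hk
      rw [runEnd_eq, if_neg (by rintro ⟨h1, -⟩; omega)]
    | succ k ih =>
      intro d hk
      rw [runEnd_eq]
      split
      · next h => exact le_trans (Nat.le_succ d) (ih (d + 1) (by omega))
      · exact Nat.le_refl d
  exact key row.length d (by omega)

theorem runEnd_le_length (row : List Int) (d : Nat) (hd : d ≤ row.length) :
    runEnd row d ≤ row.length := by
  have key : ∀ k d, row.length - d ≤ k → d ≤ row.length → runEnd row d ≤ row.length := by
    intro k
    induction k with
    | zero =>
      intro d hk _
      rw [runEnd_eq, if_neg (by rintro ⟨h1, -⟩; omega)]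
      omega
    | succ k ih =>
      intro d hk hd
      rw [runEnd_eq]
      split
      · next h => exact ih (d + 1) (by omega) (by omega)
      · exact hd
  exact key row.length d (by omega) hd

theorem runEnd_gt (row : List Int) (c : Nat) (h : c < row.length) (h1 : row[c]? = some 1) :
    c < runEnd row c := by
  rw [runEnd_eq, if_pos ⟨h, h1⟩]
  exact Nat.lt_of_lt_of_le (Nat.lt_succ_self c) (le_runEnd row (c + 1))

-- fillRow's fuel is irrelevant once sufficient, giving its three unfolding equations
theorem fillRowF_congr (prev : List Int) :
    ∀ f1 f2 (row : List Int) (c : Nat), row.length - c ≤ f1 → row.length - c ≤ f2 →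
      fillRowF prev f1 row c = fillRowF prev f2 row c := by
  intro f1
  induction f1 with
  | zero =>
    intro f2 row c h1 h2
    cases f2 with
    | zero => rfl
    | succ f2 =>
      simp only [fillRowF]
      rw [if_neg (by omega)]
  | succ f1 ih =>
    intro f2 row c h1 h2
    cases f2 with
    | zero =>
      simp only [fillRowF]
      rw [if_neg (by omega)]
    | succ f2 =>
      simp only [fillRowF]
      by_cases hc : c < row.length
      · rw [if_pos hc, if_pos hc]
        by_cases hw : row[c]? ≠ some 1
        · rw [if_pos hw, if_pos hw]
          exact ih f2 row (c + 1) (by omega) (by omega)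
        · rw [if_neg hw, if_neg hw]
          have hr1 : row[c]? = some 1 := not_not.mp hw
          have hgt := runEnd_gt row c hc hr1
          have hle := runEnd_le_length row c (Nat.le_of_lt hc)
          apply ih
          · split
            · simp only [List.length_append, List.length_take, List.length_replicate,
                List.length_drop]
              omega
            · omega
          · split
            · simp only [List.length_append, List.length_take, List.length_replicate,
                List.length_drop]
              omega
            · omega
      · rw [if_neg hc, if_neg hc]

-- unfolding equations of fillRow
theorem fillRow_stop (prev row : List Int) (c : Nat) (h : ¬ c < row.length) :
    fillRow prev row c = row := by
  unfold fillRow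
  cases hf : row.length - c with
  | zero => rfl
  | succ f =>
    simp only [fillRowF]
    rw [if_neg h]

theorem fillRow_wall (prev row : List Int) (c : Nat) (h : c < row.length)
    (h1 : row[c]? ≠ some 1) :
    fillRow prev row c = fillRow prev row (c + 1) := by
  unfold fillRow
  obtain ⟨f, hf⟩ : ∃ f, row.length - c = f + 1 := ⟨row.length - c - 1, by omega⟩
  rw [hf]
  simp only [fillRowF]
  rw [if_pos h, if_pos h1]
  exact fillRowF_congr prev f (row.length - (c + 1)) row (c + 1) (by omega) (by omega)

theorem fillRow_run (prev row : List Int) (c : Nat) (h : c < row.length)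
    (h1 : row[c]? = some 1) :
    fillRow prev row c = fillRow prev
      (if ((List.range' c (runEnd row c - c)).any fun i => (prev[i]?.getD 0) == 2)
          || (decide (0 < c) && ((row[c - 1]?.getD 0) == 2))
          || (decide (runEnd row c < row.length) && ((row[runEnd row c]?.getD 0) == 2))
       then row.take c ++ List.replicate (runEnd row c - c) 2 ++ row.drop (runEnd row c)
       else row) (runEnd row c) := by
  unfold fillRow
  obtain ⟨f, hf⟩ : ∃ f, row.length - c = f + 1 := ⟨row.length - c - 1, by omega⟩
  rw [hf]
  simp only [fillRowF]
  rw [if_pos h, if_neg (not_not_intro h1)]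
  have hgt := runEnd_gt row c h h1
  have hle := runEnd_le_length row c (Nat.le_of_lt h)
  apply fillRowF_congr
  · split
    · simp only [List.length_append, List.length_take, List.length_replicate, List.length_drop]
      omega
    · omega
  · split
    · simp only [List.length_append, List.length_take, List.length_replicate, List.length_drop]
      omega
    · omega

-- the remaining runEnd facts (specification of the maximal run)
theorem runEnd_ones (row : List Int) (c : Nat) :
    ∀ i, c ≤ i → i < runEnd row c → row[i]? = some 1 := by
  have key : ∀ k d, row.length - d ≤ k → ∀ i, d ≤ i → i < runEnd row d → row[i]? = some 1 := by
    intro k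
    induction k with
    | zero =>
      intro d hk i h1 h2
      rw [runEnd_eq, if_neg (by rintro ⟨hh, -⟩; omega)] at h2
      omega
    | succ k ih =>
      intro d hk i h1 h2
      rw [runEnd_eq] at h2
      split at h2
      · next hcond =>
        by_cases hid : i = d
        · subst hid; exact hcond.2
        · exact ih (d + 1) (by omega) i (by omega) h2
      · omega
  exact key row.length c (by omega)

theorem runEnd_stop (row : List Int) (c : Nat) :
    runEnd row c < row.length → ¬ row[runEnd row c]? = some 1 := by
  have key : ∀ k d, row.length - d ≤ k →
      runEnd row d < row.length → ¬ row[runEnd row d]? = some 1 := by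
    intro k
    induction k with
    | zero =>
      intro d hk
      rw [runEnd_eq, if_neg (by rintro ⟨hh, -⟩; omega)]
      intro h
      omega
    | succ k ih =>
      intro d hk
      rw [runEnd_eq]
      split
      · next hcond => exact ih (d + 1) (by omega)
      · next hcond =>
        intro hlt h1
        exact hcond ⟨hlt, h1⟩
  exact key row.length c (by omega)

theorem runEnd_congr (row cur : List Int) (hlen : row.length = cur.length) (c : Nat)
    (hag : ∀ i, c ≤ i → row[i]? = cur[i]?) :
    ∀ d, c ≤ d → runEnd row d = runEnd cur d := by
  have key : ∀ k d, row.length - d ≤ k → c ≤ d → runEnd row d = runEnd cur d := by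
    intro k
    induction k with
    | zero =>
      intro d hk hcd
      rw [runEnd_eq, if_neg (by rintro ⟨hh, -⟩; omega)]
      rw [runEnd_eq, if_neg (by rintro ⟨hh, -⟩; omega)]
    | succ k ih =>
      intro d hk hcd
      have hiff : (d < row.length ∧ row[d]? = some 1) ↔ (d < cur.length ∧ cur[d]? = some 1) := by
        rw [hlen, hag d hcd]
      by_cases hcond : d < cur.length ∧ cur[d]? = some 1
      · rw [runEnd_eq, if_pos (hiff.mpr hcond)]
        conv_rhs => rw [runEnd_eq]
        rw [if_pos hcond]
        exact ih (d + 1) (by omega) (by omega)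
      · rw [runEnd_eq, if_neg (fun hh => hcond (hiff.mp hh))]
        conv_rhs => rw [runEnd_eq]
        rw [if_neg hcond]
  exact fun d => key row.length d (by omega)

-- indexing the flooded-run splice
theorem splice_get (row : List Int) (c d : Nat) (hcd : c ≤ d) (hd : d ≤ row.length) (i : Nat) :
    (row.take c ++ List.replicate (d - c) (2 : Int) ++ row.drop d)[i]? =
      if i < c then row[i]? else if i < d then some 2 else row[i]? := by
  have hc : c ≤ row.length := le_trans hcd hd
  rw [List.append_assoc, List.getElem?_append]
  simp only [List.length_take]
  by_cases h1 : i < c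
  · rw [if_pos (by omega), if_pos h1, List.getElem?_take, if_pos h1]
  · rw [if_neg (by omega), if_neg h1, List.getElem?_append]
    simp only [List.length_replicate]
    by_cases h2 : i < d
    · rw [if_pos (by omega), if_pos h2, List.getElem?_replicate, if_pos (by omega)]
    · rw [if_neg (by omega), if_neg h2, List.getElem?_drop]
      congr 1
      omega

-- left/right reachability closures over a processed row (proof-side)
def reachL (D : List Int) : Nat → Bool
  | 0 => D[0]? == some 2
  | j + 1 => D[j + 1]? == some 2 || (D[j + 1]? == some 1 && reachL D j)

def reachR (F : List Int) (j : Nat) : Bool :=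
  if h : j + 1 < F.length then F[j]? == some 2 || (F[j]? == some 1 && reachR F (j + 1))
  else F[j]? == some 2
termination_by F.length - j
decreasing_by omega

theorem reachL_zero_iff (D : List Int) : reachL D 0 = true ↔ D[0]? = some 2 := by
  simp [reachL]

theorem reachL_succ_iff (D : List Int) (j : Nat) :
    reachL D (j + 1) = true ↔ (D[j + 1]? = some 2 ∨ (D[j + 1]? = some 1 ∧ reachL D j = true)) := by
  simp [reachL]

theorem reachL_D2 {D : List Int} {j : Nat} (h : D[j]? = some 2) : reachL D j = true := by
  cases j with
  | zero => rw [reachL_zero_iff]; exact h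
  | succ j => rw [reachL_succ_iff]; exact Or.inl h

theorem reachR_true_iff (F : List Int) (j : Nat) :
    reachR F j = true ↔
      (F[j]? = some 2 ∨ (j + 1 < F.length ∧ F[j]? = some 1 ∧ reachR F (j + 1) = true)) := by
  rw [reachR]
  split
  · next h =>
    simp only [Bool.or_eq_true, Bool.and_eq_true, beq_iff_eq]
    tauto
  · next h =>
    simp only [beq_iff_eq]
    constructor
    · exact Or.inl
    · rintro (h2 | ⟨hlt, -, -⟩)
      · exact h2
      · exact absurd hlt h

theorem reachR_of_F2 {F : List Int} {j : Nat} (h : F[j]? = some 2) : reachR F j = true :=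
  (reachR_true_iff F j).mpr (Or.inl h)

theorem reachR_false {F : List Int} {j : Nat} (h : F[j]? = none) : ¬ reachR F j = true := by
  rw [reachR_true_iff, h]
  rintro (h2 | ⟨-, h2, -⟩) <;> simp at h2

-- pointwise value of altDown (with exact row width)
theorem Dget (n : Int) (prev cur : List Int) (hcur : (cur.length : Int) = n)
    {j : Nat} {v : Int} (hv : cur[j]? = some v) :
    (altDown n prev cur)[j]? = some (if prev[j]? = some 2 ∧ v = 1 then 2 else v) := by
  have hj : j < cur.length := (List.getElem?_eq_some_iff.mp hv).1
  have hjn : (j : Int) < n := by omega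
  rw [altDown_get, hv]
  simp only [Option.map_some, PySem.List.pyGet?_natCast]
  congr 1
  by_cases hp : prev[j]? = some 2 <;> by_cases h1 : v = 1 <;> simp [hp, h1, hjn]

-- the forward flag scan computes the left-reachability closure
theorem Fchar (n : Int) (D : List Int) (hle : (D.length : Int) ≤ n) (j : Nat) :
    (altFwd n false 0 D)[j]? = if reachL D j = true then some 2 else D[j]? := by
  induction j with
  | zero =>
    rw [altFwd_zero_get]
    by_cases h : D[0]? = some 2
    · rw [if_pos (reachL_D2 h), h]
    · rw [if_neg (fun hh => h ((reachL_zero_iff D).mp hh))]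
  | succ j ih =>
    rw [altFwd_zero_succ]
    have hF2 : ((altFwd n false 0 D)[j]? = some 2) ↔ reachL D j = true := by
      rw [ih]
      by_cases hr : reachL D j = true
      · rw [if_pos hr]; exact ⟨fun _ => hr, fun _ => rfl⟩
      · rw [if_neg hr]
        exact ⟨fun hD => absurd (reachL_D2 hD) hr, fun h => absurd h hr⟩
    cases hD : D[j + 1]? with
    | none =>
      simp only [Option.map_none]
      have hnr : ¬ reachL D (j + 1) = true := by
        rw [reachL_succ_iff, hD]
        rintro (h | ⟨h, -⟩) <;> simp at h
      rw [if_neg hnr]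
    | some v =>
      have hjn : (j : Int) < n := by
        have hlt : j + 1 < D.length := (List.getElem?_eq_some_iff.mp hD).1
        omega
      simp only [Option.map_some]
      by_cases h1 : v = 1
      · subst h1
        by_cases hr : reachL D j = true
        · rw [if_pos ⟨rfl, hF2.mpr hr, hjn⟩,
            if_pos (by rw [reachL_succ_iff, hD]; exact Or.inr ⟨rfl, hr⟩)]
        · rw [if_neg (by rintro ⟨-, h2, -⟩; exact hr (hF2.mp h2)),
            if_neg (by rw [reachL_succ_iff, hD]
                       rintro (h | ⟨-, h⟩)
                       · exact absurd (Option.some.inj h) (by norm_num)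
                       · exact hr h)]
      · by_cases h2 : v = 2
        · subst h2
          rw [if_neg (by rintro ⟨h, -, -⟩; exact h1 h),
            if_pos (by rw [reachL_succ_iff, hD]; exact Or.inl rfl)]
        · rw [if_neg (by rintro ⟨h, -, -⟩; exact h1 h),
            if_neg (by rw [reachL_succ_iff, hD]
                       rintro (h | ⟨h, -⟩)
                       · exact h2 (Option.some.inj h)
                       · exact h1 (Option.some.inj h))]

-- the backward flag scan (over the reversed row) computes the right-reachability closure
theorem Gchar (n : Int) (F : List Int) (hle : (F.length : Int) ≤ n) :
    ∀ j : Nat, ((altBwd n false ((F.length : Int) - 1) F.reverse).reverse)[j]? =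
      if reachR F j = true then some 2 else F[j]? := by
  have hGlen : ((altBwd n false ((F.length : Int) - 1) F.reverse).reverse).length = F.length :=
    altG_len n F
  have key : ∀ (k j : Nat), F.length ≤ j + k →
      ((altBwd n false ((F.length : Int) - 1) F.reverse).reverse)[j]? =
        if reachR F j = true then some 2 else F[j]? := by
    intro k
    induction k with
    | zero =>
      intro j hj
      have h1 : F[j]? = none := List.getElem?_eq_none (by omega)
      have h2 : ((altBwd n false ((F.length : Int) - 1) F.reverse).reverse)[j]? = none :=
        List.getElem?_eq_none (by omega)
      rw [h2, if_neg (reachR_false h1), h1]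
    | succ k ih =>
      intro j hj
      by_cases hjl : j < F.length
      · by_cases hj1 : j + 1 < F.length
        · rw [altG_form n F j hj1]
          have hjn : (j : Int) + 1 < n := by omega
          have hG2 : (((altBwd n false ((F.length : Int) - 1) F.reverse).reverse)[j + 1]? = some 2)
              ↔ reachR F (j + 1) = true := by
            rw [ih (j + 1) (by omega)]
            by_cases hr : reachR F (j + 1) = true
            · rw [if_pos hr]; exact ⟨fun _ => hr, fun _ => rfl⟩
            · rw [if_neg hr]
              exact ⟨fun hD => absurd (reachR_of_F2 hD) hr, fun h => absurd h hr⟩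
          obtain ⟨v, hv⟩ : ∃ v, F[j]? = some v := ⟨F[j], List.getElem?_eq_getElem hjl⟩
          rw [hv]
          simp only [Option.map_some]
          have hRj : reachR F j = true ↔ (v = 2 ∨ (v = 1 ∧ reachR F (j + 1) = true)) := by
            rw [reachR_true_iff, hv]
            constructor
            · rintro (h | ⟨-, h, hr⟩)
              · exact Or.inl (Option.some.inj h)
              · exact Or.inr ⟨Option.some.inj h, hr⟩
            · rintro (h | ⟨h, hr⟩)
              · exact Or.inl (by rw [h])
              · exact Or.inr ⟨hj1, by rw [h], hr⟩
          by_cases h1 : v = 1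
          · subst h1
            by_cases hr : reachR F (j + 1) = true
            · rw [if_pos ⟨rfl, hG2.mpr hr, hjn⟩, if_pos (hRj.mpr (Or.inr ⟨rfl, hr⟩))]
            · rw [if_neg (by rintro ⟨-, h2, -⟩; exact hr (hG2.mp h2)),
                if_neg (by intro h
                           rcases hRj.mp h with h | ⟨-, h⟩
                           · exact absurd h (by norm_num)
                           · exact hr h)]
          · by_cases h2 : v = 2
            · subst h2
              rw [if_neg (by rintro ⟨h, -, -⟩; exact h1 h), if_pos (hRj.mpr (Or.inl rfl))]
            · rw [if_neg (by rintro ⟨h, -, -⟩; exact h1 h),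
                if_neg (by intro h
                           rcases hRj.mp h with h | ⟨h, -⟩
                           · exact h2 h
                           · exact h1 h)]
        · have hje : j = F.length - 1 := by omega
          have hF0 : 0 < F.length := by omega
          rw [hje, altG_last n F hF0]
          by_cases h2 : F[F.length - 1]? = some 2
          · rw [if_pos (reachR_of_F2 h2), h2]
          · rw [if_neg (by rw [reachR_true_iff]
                           rintro (h | ⟨hlt, -, -⟩)
                           · exact h2 h
                           · omega)]
      · have h1 : F[j]? = none := List.getElem?_eq_none (by omega)
        have h2 : ((altBwd n false ((F.length : Int) - 1) F.reverse).reverse)[j]? = none :=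
          List.getElem?_eq_none (by omega)
        rw [h2, if_neg (reachR_false h1), h1]
  exact fun j => key F.length j (by omega)

-- walls (cells that are not 1): values and reachability
theorem reachL_wall_iff (n : Int) (prev cur : List Int) (hcur : (cur.length : Int) = n)
    {j : Nat} {w : Int} (hw : cur[j]? = some w) (h1 : w ≠ 1) :
    (reachL (altDown n prev cur) j = true ↔ w = 2) := by
  have hD : (altDown n prev cur)[j]? = some w := by
    rw [Dget n prev cur hcur hw]
    simp [h1]
  cases j with
  | zero =>
    rw [reachL_zero_iff, hD]
    exact ⟨fun h => Option.some.inj h, fun h => by rw [h]⟩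
  | succ j =>
    rw [reachL_succ_iff, hD]
    constructor
    · rintro (h | ⟨h, -⟩)
      · exact Option.some.inj h
      · exact absurd (Option.some.inj h) h1
    · intro h
      exact Or.inl (by rw [h])

theorem F_wall (n : Int) (prev cur : List Int) (hcur : (cur.length : Int) = n)
    {j : Nat} {w : Int} (hw : cur[j]? = some w) (h1 : w ≠ 1) :
    (altFwd n false 0 (altDown n prev cur))[j]? = some w := by
  have hle : ((altDown n prev cur).length : Int) ≤ n := by rw [length_altDown]; omega
  have hD : (altDown n prev cur)[j]? = some w := by
    rw [Dget n prev cur hcur hw]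
    simp [h1]
  have hL := reachL_wall_iff n prev cur hcur hw h1
  rw [Fchar n _ hle j]
  by_cases h2 : w = 2
  · rw [if_pos (hL.mpr h2), h2]
  · rw [if_neg (fun h => h2 (hL.mp h)), hD]

theorem reachR_wall_iff (n : Int) (prev cur : List Int) (hcur : (cur.length : Int) = n)
    {j : Nat} {w : Int} (hw : cur[j]? = some w) (h1 : w ≠ 1) :
    (reachR (altFwd n false 0 (altDown n prev cur)) j = true ↔ w = 2) := by
  have hF := F_wall n prev cur hcur hw h1
  rw [reachR_true_iff, hF]
  constructor
  · rintro (h | ⟨-, h, -⟩)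
    · exact Option.some.inj h
    · exact absurd (Option.some.inj h) h1
  · intro h2
    exact Or.inl (by rw [h2])

theorem wall_target (n : Int) (prev cur : List Int) (hcur : (cur.length : Int) = n)
    {j : Nat} {w : Int} (hw : cur[j]? = some w) (h1 : w ≠ 1) :
    (if reachR (altFwd n false 0 (altDown n prev cur)) j = true then some 2
      else (altDown n prev cur)[j]?) = some w := by
  have hwall := reachR_wall_iff n prev cur hcur hw h1
  by_cases h2 : w = 2
  · rw [if_pos (hwall.mpr h2), h2]
  · rw [if_neg (fun h => h2 (hwall.mp h)), Dget n prev cur hcur hw]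
    simp [h1]

-- inside a run of 1-cells
theorem D_run (n : Int) (prev cur : List Int) (hcur : (cur.length : Int) = n)
    {c d : Nat} (hones : ∀ i, c ≤ i → i < d → cur[i]? = some 1)
    {i : Nat} (h1 : c ≤ i) (h2 : i < d) :
    (altDown n prev cur)[i]? = some (if prev[i]? = some 2 then 2 else 1) := by
  rw [Dget n prev cur hcur (hones i h1 h2)]
  by_cases hp : prev[i]? = some 2 <;> simp [hp]

theorem F_run (n : Int) (prev cur : List Int) (hcur : (cur.length : Int) = n)
    {c d : Nat} (hones : ∀ i, c ≤ i → i < d → cur[i]? = some 1)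
    {i : Nat} (h1 : c ≤ i) (h2 : i < d) :
    (altFwd n false 0 (altDown n prev cur))[i]? =
      if reachL (altDown n prev cur) i = true then some 2 else some 1 := by
  have hle : ((altDown n prev cur).length : Int) ≤ n := by rw [length_altDown]; omega
  rw [Fchar n _ hle i]
  by_cases hr : reachL (altDown n prev cur) i = true
  · rw [if_pos hr, if_pos hr]
  · rw [if_neg hr, if_neg hr, D_run n prev cur hcur hones h1 h2]
    by_cases hp : prev[i]? = some 2
    · exact absurd (reachL_D2 (by rw [D_run n prev cur hcur hones h1 h2]; simp [hp])) hr
    · simp [hp]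

theorem reachL_run_le (n : Int) (prev cur : List Int) (hcur : (cur.length : Int) = n)
    {c d : Nat} (hones : ∀ i, c ≤ i → i < d → cur[i]? = some 1) :
    ∀ i j, c ≤ i → i ≤ j → j < d → reachL (altDown n prev cur) i = true →
      reachL (altDown n prev cur) j = true := by
  intro i j hci hij hjd h
  induction j, hij using Nat.le_induction with
  | base => exact h
  | succ j hij ih =>
    have hih := ih (by omega)
    rw [reachL_succ_iff, D_run n prev cur hcur hones (by omega) hjd]
    by_cases hp : prev[j + 1]? = some 2
    · rw [if_pos hp]; exact Or.inl rfl
    · rw [if_neg hp]; exact Or.inr ⟨rfl, hih⟩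

theorem reachL_run_iff (n : Int) (prev cur : List Int) (hcur : (cur.length : Int) = n)
    {c d : Nat} (hones : ∀ i, c ≤ i → i < d → cur[i]? = some 1)
    (hc : c < cur.length) (hb : c = 0 ∨ cur[c - 1]? ≠ some 1) :
    ∀ j, c ≤ j → j < d →
      (reachL (altDown n prev cur) j = true ↔
        ((∃ i, c ≤ i ∧ i ≤ j ∧ prev[i]? = some 2) ∨ (0 < c ∧ cur[c - 1]? = some 2))) := by
  intro j hcj
  induction j, hcj using Nat.le_induction with
  | base =>
    intro hjd
    match hcc : c with
    | 0 =>
      rw [reachL_zero_iff, D_run n prev cur hcur hones (Nat.le_refl 0) hjd]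
      by_cases hp : prev[0]? = some 2
      · rw [if_pos hp]
        exact ⟨fun _ => Or.inl ⟨0, Nat.le_refl 0, Nat.le_refl 0, hp⟩, fun _ => rfl⟩
      · rw [if_neg hp]
        constructor
        · intro h; exact absurd (Option.some.inj h) (by norm_num)
        · rintro (⟨i2, hi1, hi2, hp2⟩ | ⟨h0, -⟩)
          · have : i2 = 0 := by omega
            subst this; exact absurd hp2 hp
          · omega
    | s + 1 =>
      have hs : cur[s]? ≠ some 1 := by
        rcases hb with h | h
        · omega
        · simpa using h
      have hsl : s < cur.length := by omega
      obtain ⟨w, hw⟩ : ∃ w, cur[s]? = some w := ⟨cur[s], List.getElem?_eq_getElem hsl⟩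
      have hw1 : w ≠ 1 := fun he => hs (by rw [hw, he])
      have hwall := reachL_wall_iff n prev cur hcur hw hw1
      rw [reachL_succ_iff, D_run n prev cur hcur hones (Nat.le_refl (s + 1)) hjd]
      by_cases hp : prev[s + 1]? = some 2
      · rw [if_pos hp]
        constructor
        · intro _; exact Or.inl ⟨s + 1, Nat.le_refl _, Nat.le_refl _, hp⟩
        · intro _; exact Or.inl rfl
      · rw [if_neg hp]
        constructor
        · rintro (h | ⟨-, hL⟩)
          · exact absurd (Option.some.inj h) (by norm_num)
          · refine Or.inr ⟨by omega, ?_⟩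
            have : cur[s + 1 - 1]? = some w := by simpa using hw
            rw [this, hwall.mp hL]
        · rintro (⟨i2, hi1, hi2, hp2⟩ | ⟨-, h2⟩)
          · have : i2 = s + 1 := by omega
            subst this; exact absurd hp2 hp
          · refine Or.inr ⟨rfl, hwall.mpr ?_⟩
            have hcs : cur[s + 1 - 1]? = some w := by simpa using hw
            rw [hcs] at h2
            exact Option.some.inj h2
  | succ j hcj ihP =>
    intro hjd
    have ihj := ihP (by omega)
    rw [reachL_succ_iff, D_run n prev cur hcur hones (by omega) hjd]
    by_cases hp : prev[j + 1]? = some 2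
    · rw [if_pos hp]
      constructor
      · intro _; exact Or.inl ⟨j + 1, by omega, Nat.le_refl _, hp⟩
      · intro _; exact Or.inl rfl
    · rw [if_neg hp]
      constructor
      · rintro (h | ⟨-, hL⟩)
        · exact absurd (Option.some.inj h) (by norm_num)
        · rcases ihj.mp hL with ⟨i2, hi1, hi2, hp2⟩ | hr
          · exact Or.inl ⟨i2, hi1, by omega, hp2⟩
          · exact Or.inr hr
      · rintro (⟨i2, hi1, hi2, hp2⟩ | hr)
        · by_cases hi2e : i2 = j + 1
          · subst hi2e; exact absurd hp2 hp
          · exact Or.inr ⟨rfl, ihj.mpr (Or.inl ⟨i2, hi1, by omega, hp2⟩)⟩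
        · exact Or.inr ⟨rfl, ihj.mpr (Or.inr hr)⟩

theorem reachR_run_iff (n : Int) (prev cur : List Int) (hcur : (cur.length : Int) = n)
    {c d : Nat} (hones : ∀ i, c ≤ i → i < d → cur[i]? = some 1)
    (hstop : d < cur.length → ¬ cur[d]? = some 1)
    (hc : c < cur.length) (hcd : c < d) (hdle : d ≤ cur.length) :
    ∀ j, c ≤ j → j < d →
      (reachR (altFwd n false 0 (altDown n prev cur)) j = true ↔
        (reachL (altDown n prev cur) (d - 1) = true ∨ (d < cur.length ∧ cur[d]? = some 2))) := by
  have hFlen : (altFwd n false 0 (altDown n prev cur)).length = cur.length := by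
    rw [length_altFwd, length_altDown]
  have key : ∀ t j, c ≤ j → j < d → d - 1 - j = t →
      (reachR (altFwd n false 0 (altDown n prev cur)) j = true ↔
        (reachL (altDown n prev cur) (d - 1) = true ∨ (d < cur.length ∧ cur[d]? = some 2))) := by
    intro t
    induction t with
    | zero =>
      intro j hcj hjd ht
      have hje : j = d - 1 := by omega
      have hFj := F_run n prev cur hcur hones hcj hjd
      by_cases hdl : d < cur.length
      · -- the cell at d is a wall
        obtain ⟨w, hw⟩ : ∃ w, cur[d]? = some w := ⟨cur[d], List.getElem?_eq_getElem hdl⟩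
        have hw1 : w ≠ 1 := fun he => hstop hdl (by rw [hw, he])
        have hRd := reachR_wall_iff n prev cur hcur hw hw1
        have hj1 : j + 1 = d := by omega
        rw [reachR_true_iff, hFj]
        by_cases hr : reachL (altDown n prev cur) j = true
        · rw [if_pos hr]
          constructor
          · intro _; exact Or.inl (hje ▸ hr)
          · intro _; exact Or.inl rfl
        · rw [if_neg hr]
          constructor
          · rintro (h | ⟨-, -, hRR⟩)
            · exact absurd (Option.some.inj h) (by norm_num)
            · rw [hj1] at hRR
              refine Or.inr ⟨hdl, ?_⟩
              rw [hw, hRd.mp hRR]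
          · rintro (hL | ⟨-, h2⟩)
            · exact absurd (hje ▸ hL) hr
            · refine Or.inr ⟨by omega, rfl, ?_⟩
              rw [hj1]
              exact hRd.mpr (by rw [hw] at h2; exact Option.some.inj h2)
      · -- d = cur.length
        have hde : d = cur.length := by omega
        rw [reachR_true_iff, hFj]
        by_cases hr : reachL (altDown n prev cur) j = true
        · rw [if_pos hr]
          exact ⟨fun _ => Or.inl (hje ▸ hr), fun _ => Or.inl rfl⟩
        · rw [if_neg hr]
          constructor
          · rintro (h | ⟨hlt, -, -⟩)
            · exact absurd (Option.some.inj h) (by norm_num)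
            · rw [hFlen] at hlt; omega
          · rintro (hL | ⟨h2, -⟩)
            · exact absurd (hje ▸ hL) hr
            · omega
    | succ t ih =>
      intro j hcj hjd ht
      have hj1 : j + 1 < d := by omega
      have hih := ih (j + 1) (by omega) hj1 (by omega)
      have hFj := F_run n prev cur hcur hones hcj hjd
      rw [reachR_true_iff, hFj]
      by_cases hr : reachL (altDown n prev cur) j = true
      · rw [if_pos hr]
        constructor
        · intro _
          exact Or.inl (reachL_run_le n prev cur hcur hones j (d - 1) hcj (by omega) (by omega) hr)
        · intro _; exact Or.inl rfl
      · rw [if_neg hr]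
        constructor
        · rintro (h | ⟨-, -, hRR⟩)
          · exact absurd (Option.some.inj h) (by norm_num)
          · exact hih.mp hRR
        · intro h
          refine Or.inr ⟨by rw [hFlen]; omega, rfl, hih.mpr h⟩
  exact fun j h1 h2 => key (d - 1 - j) j h1 h2 rfl

theorem run_reach (n : Int) (prev cur : List Int) (hcur : (cur.length : Int) = n)
    {c d : Nat} (hones : ∀ i, c ≤ i → i < d → cur[i]? = some 1)
    (hstop : d < cur.length → ¬ cur[d]? = some 1)
    (hc : c < cur.length) (hcd : c < d) (hdle : d ≤ cur.length)
    (hb : c = 0 ∨ cur[c - 1]? ≠ some 1)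
    {j : Nat} (h1 : c ≤ j) (h2 : j < d) :
    (reachR (altFwd n false 0 (altDown n prev cur)) j = true ↔
      ((∃ i, c ≤ i ∧ i < d ∧ prev[i]? = some 2) ∨ (0 < c ∧ cur[c - 1]? = some 2) ∨
        (d < cur.length ∧ cur[d]? = some 2))) := by
  rw [reachR_run_iff n prev cur hcur hones hstop hc hcd hdle j h1 h2,
    reachL_run_iff n prev cur hcur hones hc hb (d - 1) (by omega) (by omega)]
  constructor
  · rintro ((⟨i2, ha, hb2, hp⟩ | hl) | hrt)
    · exact Or.inl ⟨i2, ha, by omega, hp⟩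
    · exact Or.inr (Or.inl hl)
    · exact Or.inr (Or.inr hrt)
  · rintro (⟨i2, ha, hb2, hp⟩ | hl | hrt)
    · exact Or.inl (Or.inl ⟨i2, ha, by omega, hp⟩)
    · exact Or.inl (Or.inr hl)
    · exact Or.inr hrt

theorem getD_beq_two (o : Option Int) : (((o.getD 0) == 2) = true) ↔ o = some 2 := by
  cases o with
  | none => simp
  | some a => simp

-- the main induction: fillRow places the reachability value at every index
theorem fill_main (n : Int) (prev cur : List Int) (hcur : (cur.length : Int) = n)
    (hprev : n ≤ (prev.length : Int)) :
    ∀ (k : Nat) (row : List Int) (c : Nat), cur.length - c ≤ k →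
      row.length = cur.length →
      (∀ i, c ≤ i → row[i]? = cur[i]?) →
      (∀ i, i < c → row[i]? =
        if reachR (altFwd n false 0 (altDown n prev cur)) i = true then some 2
        else (altDown n prev cur)[i]?) →
      (c = 0 ∨ cur[c - 1]? ≠ some 1 ∨ cur[c]? ≠ some 1) →
      ∀ i, (fillRow prev row c)[i]? =
        if reachR (altFwd n false 0 (altDown n prev cur)) i = true then some 2
        else (altDown n prev cur)[i]? := by
  have hFlen : (altFwd n false 0 (altDown n prev cur)).length = cur.length := by
    rw [length_altFwd, length_altDown]
  have hDlen : (altDown n prev cur).length = cur.length := length_altDown n prev cur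
  have htail : ∀ (row : List Int) (c : Nat), row.length = cur.length → ¬ c < row.length →
      (∀ i, c ≤ i → row[i]? = cur[i]?) →
      (∀ i, i < c → row[i]? =
        if reachR (altFwd n false 0 (altDown n prev cur)) i = true then some 2
        else (altDown n prev cur)[i]?) →
      ∀ i, (fillRow prev row c)[i]? =
        if reachR (altFwd n false 0 (altDown n prev cur)) i = true then some 2
        else (altDown n prev cur)[i]? := by
    intro row c hlen hc hsuf hpre i
    rw [fillRow_stop prev row c hc]
    by_cases hi : i < c
    · exact hpre i hi
    · have hil : cur.length ≤ i := by omega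
      have hF : (altFwd n false 0 (altDown n prev cur))[i]? = none :=
        List.getElem?_eq_none (by omega)
      rw [hsuf i (by omega), List.getElem?_eq_none hil, if_neg (reachR_false hF),
        List.getElem?_eq_none (by omega)]
  intro k
  induction k with
  | zero =>
    intro row c hk hlen hsuf hpre _
    exact htail row c hlen (by omega) hsuf hpre
  | succ k ih =>
    intro row c hk hlen hsuf hpre hbd i
    by_cases hc : c < row.length
    · have hcl : c < cur.length := by omega
      have hrc : row[c]? = cur[c]? := hsuf c (Nat.le_refl c)
      by_cases h1 : row[c]? = some 1
      · -- a run starts (or continues) at c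
        have hcur1 : cur[c]? = some 1 := by rw [← hrc]; exact h1
        have hbc : c = 0 ∨ cur[c - 1]? ≠ some 1 := by
          rcases hbd with h | h | h
          · exact Or.inl h
          · exact Or.inr h
          · exact absurd hcur1 h
        have hdc : runEnd row c = runEnd cur c := runEnd_congr row cur hlen c hsuf c (Nat.le_refl c)
        have hgt : c < runEnd cur c := runEnd_gt cur c hcl hcur1
        have hdle : runEnd cur c ≤ cur.length := runEnd_le_length cur c (Nat.le_of_lt hcl)
        have hones : ∀ i2, c ≤ i2 → i2 < runEnd cur c → cur[i2]? = some 1 := runEnd_ones cur c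
        have hstop : runEnd cur c < cur.length → ¬ cur[runEnd cur c]? = some 1 := runEnd_stop cur c
        rw [fillRow_run prev row c hc h1, hdc]
        have hrowd : row[runEnd cur c]? = cur[runEnd cur c]? := hsuf _ (by omega)
        -- the seeded test on `row` decides the reachability condition on `cur`
        have hSP : (((List.range' c (runEnd cur c - c)).any fun i2 => (prev[i2]?.getD 0) == 2)
              || (decide (0 < c) && ((row[c - 1]?.getD 0) == 2))
              || (decide (runEnd cur c < row.length) && ((row[runEnd cur c]?.getD 0) == 2))) = true
            ↔ ((∃ i2, c ≤ i2 ∧ i2 < runEnd cur c ∧ prev[i2]? = some 2) ∨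
                (0 < c ∧ cur[c - 1]? = some 2) ∨
                (runEnd cur c < cur.length ∧ cur[runEnd cur c]? = some 2)) := by
          simp only [Bool.or_eq_true, Bool.and_eq_true, decide_eq_true_iff, List.any_eq_true,
            List.mem_range'_1, getD_beq_two]
          constructor
          · rintro ((⟨i2, ⟨ha, hb2⟩, hp⟩ | ⟨h0, hrow⟩) | ⟨hdl, hrow⟩)
            · exact Or.inl ⟨i2, ha, by omega, hp⟩
            · refine Or.inr (Or.inl ⟨h0, ?_⟩)
              have hcm : c - 1 < c := by omega
              obtain ⟨w, hw⟩ : ∃ w, cur[c - 1]? = some w :=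
                ⟨cur[c - 1], List.getElem?_eq_getElem (by omega)⟩
              have hw1 : w ≠ 1 := by
                rcases hbc with hx | hx
                · omega
                · exact fun he => hx (by rw [hw, he])
              have hv : row[c - 1]? = some w := by
                rw [hpre (c - 1) hcm, wall_target n prev cur hcur hw hw1]
              rw [hv] at hrow
              rw [hw, Option.some.inj hrow]
            · refine Or.inr (Or.inr ⟨by omega, ?_⟩)
              rw [← hrowd]; exact hrow
          · rintro (⟨i2, ha, hb2, hp⟩ | ⟨h0, hcur2⟩ | ⟨hdl, hcur2⟩)
            · exact Or.inl (Or.inl ⟨i2, ⟨ha, by omega⟩, hp⟩)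
            · refine Or.inl (Or.inr ⟨h0, ?_⟩)
              have hcm : c - 1 < c := by omega
              obtain ⟨w, hw⟩ : ∃ w, cur[c - 1]? = some w :=
                ⟨cur[c - 1], List.getElem?_eq_getElem (by omega)⟩
              have hw1 : w ≠ 1 := by
                rcases hbc with hx | hx
                · omega
                · exact fun he => hx (by rw [hw, he])
              have hv : row[c - 1]? = some w := by
                rw [hpre (c - 1) hcm, wall_target n prev cur hcur hw hw1]
              rw [hv]
              rw [hw] at hcur2
              exact Option.some.inj hcur2 ▸ rfl
            · refine Or.inr ⟨by omega, ?_⟩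
              rw [hrowd]; exact hcur2
        have hbd' : runEnd cur c = 0 ∨ cur[runEnd cur c - 1]? ≠ some 1 ∨
            cur[runEnd cur c]? ≠ some 1 := by
          by_cases hdl : runEnd cur c < cur.length
          · exact Or.inr (Or.inr (hstop hdl))
          · exact Or.inr (Or.inr (by rw [List.getElem?_eq_none (by omega)]; simp))
        by_cases hsb : (((List.range' c (runEnd cur c - c)).any fun i2 => (prev[i2]?.getD 0) == 2)
              || (decide (0 < c) && ((row[c - 1]?.getD 0) == 2))
              || (decide (runEnd cur c < row.length) && ((row[runEnd cur c]?.getD 0) == 2))) = true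
        · rw [if_pos hsb]
          refine ih _ (runEnd cur c) (by omega) ?_ ?_ ?_ hbd' i
          · simp only [List.length_append, List.length_take, List.length_replicate,
              List.length_drop]
            omega
          · intro i2 hi2
            rw [splice_get row c (runEnd cur c) (by omega) (by omega) i2,
              if_neg (by omega), if_neg (by omega)]
            exact hsuf i2 (by omega)
          · intro i2 hi2
            rw [splice_get row c (runEnd cur c) (by omega) (by omega) i2]
            by_cases hi2c : i2 < c
            · rw [if_pos hi2c]
              exact hpre i2 hi2c
            · rw [if_neg hi2c, if_pos hi2]
              have hR : reachR (altFwd n false 0 (altDown n prev cur)) i2 = true :=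
                (run_reach n prev cur hcur hones hstop hcl hgt hdle hbc (by omega) hi2).mpr
                  (hSP.mp hsb)
              rw [if_pos hR]
        · rw [if_neg hsb]
          refine ih row (runEnd cur c) (by omega) hlen ?_ ?_ hbd' i
          · intro i2 hi2
            exact hsuf i2 (by omega)
          · intro i2 hi2
            by_cases hi2c : i2 < c
            · exact hpre i2 hi2c
            · have hc2 : c ≤ i2 := by omega
              have hR : ¬ reachR (altFwd n false 0 (altDown n prev cur)) i2 = true :=
                fun h => hsb (hSP.mpr
                  ((run_reach n prev cur hcur hones hstop hcl hgt hdle hbc hc2 hi2).mp h))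
              rw [if_neg hR, hsuf i2 hc2, hones i2 hc2 hi2,
                D_run n prev cur hcur hones hc2 hi2]
              have hp : ¬ prev[i2]? = some 2 :=
                fun hp => hsb (hSP.mpr (Or.inl ⟨i2, hc2, hi2, hp⟩))
              rw [if_neg hp]
      · -- a wall at c: step over it
        rw [fillRow_wall prev row c hc h1]
        obtain ⟨w, hw⟩ : ∃ w, cur[c]? = some w := ⟨cur[c], List.getElem?_eq_getElem hcl⟩
        have hw1 : w ≠ 1 := fun he => h1 (by rw [hrc, hw, he])
        refine ih row (c + 1) (by omega) hlen (fun i2 hi2 => hsuf i2 (by omega)) ?_ ?_ i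
        · intro i2 hi2
          by_cases hi2c : i2 < c
          · exact hpre i2 hi2c
          · have : i2 = c := by omega
            subst this
            rw [hrc, hw, wall_target n prev cur hcur hw hw1]
        · refine Or.inr (Or.inl ?_)
          have : cur[c + 1 - 1]? = some w := by simpa using hw
          rw [this]
          exact fun he => hw1 (Option.some.inj he)
    · exact htail row c hlen hc hsuf hpre i

-- B's run flood equals A's pipeline on an exactly-n-wide row
theorem fillRow_eq (n : Int) (prev cur : List Int) (hcur : (cur.length : Int) = n)
    (hprev : n ≤ (prev.length : Int)) :
    fillRow prev cur 0 = altRow n prev cur := by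
  have hDle : ((altDown n prev cur).length : Int) ≤ n := by rw [length_altDown]; omega
  have hFlen2 : (altFwd n false 0 (altDown n prev cur)).length = cur.length := by
    rw [length_altFwd, length_altDown]
  have hFle : ((altFwd n false 0 (altDown n prev cur)).length : Int) ≤ n := by
    rw [hFlen2]; omega
  apply List.ext_getElem?
  intro i
  rw [fill_main n prev cur hcur hprev cur.length cur 0 (by omega) rfl (fun _ _ => rfl)
    (fun i2 hi2 => absurd hi2 (Nat.not_lt_zero i2)) (Or.inl rfl) i]
  rw [show altRow n prev cur =
    (altBwd n false (((altFwd n false 0 (altDown n prev cur)).length : Int) - 1)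
      (altFwd n false 0 (altDown n prev cur)).reverse).reverse from rfl]
  rw [Gchar n _ hFle i]
  by_cases hr : reachR (altFwd n false 0 (altDown n prev cur)) i = true
  · rw [if_pos hr, if_pos hr]
  · rw [if_neg hr, if_neg hr, Fchar n _ hDle i,
      if_neg (fun hL => hr (reachR_of_F2 (by rw [Fchar n _ hDle i, if_pos hL])))]

-- ================== the outer loops ==================

-- shape invariant for the B/A agreement: InvG plus exact widths for the working rows 1..n-1
def Inv2 (n : Int) (g : List (List Int)) : Prop :=
  InvG n g ∧ ∀ j : Nat, 1 ≤ j → (j : Int) < n → ((g[j]?.getD []).length : Int) = n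

theorem step_eq2 (n : Int) (g : List (List Int)) (m : Nat)
    (hm : (m : Int) + 1 < n) (hInv : Inv2 n g) :
    stepAfun n g (m : Int) = stepBfun n g ((m : Int) + 1) ∧ Inv2 n (stepAfun n g (m : Int)) := by
  obtain ⟨hG, hW⟩ := hInv
  have hstep := step_eq n g m hm hG
  have hcur : ((g[m + 1]?.getD []).length : Int) = n := hW (m + 1) (by omega) (by push_cast; omega)
  have hprev : n ≤ ((g[m]?.getD []).length : Int) := hG.2 m (by push_cast; omega)
  have hfill : fillRow (g[m]?.getD []) (g[m + 1]?.getD []) 0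
      = altRow n (g[m]?.getD []) (g[m + 1]?.getD []) := fillRow_eq n _ _ hcur hprev
  constructor
  · rw [hstep, stepB_at, hfill]
  · rw [hstep]
    refine ⟨inv_step n g m hm hG, ?_⟩
    intro j h1 hj
    by_cases hjm : j = m + 1
    · subst hjm
      rw [List.getElem?_set_self (by have := hG.1; omega), Option.getD_some, length_altRow]
      exact hW (m + 1) h1 hj
    · rw [List.getElem?_set_ne (by omega)]
      exact hW j h1 hj

-- A's outer loop (over k = 0..n-2) tracks B's loop (over r = 1..n-1)
theorem outer_loop (n : Int) (g0 : List (List Int)) (hInv : Inv2 n g0) :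
    ∀ d : Nat, (d : Int) ≤ n - 1 →
      (PySem.List.pyRange 0 (d : Int) 1).foldl (stepAfun n) g0
        = (PySem.List.pyRange 1 ((d : Int) + 1) 1).foldl (stepBfun n) g0
      ∧ Inv2 n ((PySem.List.pyRange 0 (d : Int) 1).foldl (stepAfun n) g0) := by
  intro d
  induction d with
  | zero =>
    intro _
    rw [PySem.List.pyRange_one_eq_nil (by omega), PySem.List.pyRange_one_eq_nil (by omega)]
    exact ⟨rfl, hInv⟩
  | succ d ih =>
    intro hd
    obtain ⟨heq, hInv'⟩ := ih (by push_cast at hd ⊢; omega)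
    have hcast : ((d + 1 : Nat) : Int) = (d : Int) + 1 := by push_cast; ring
    rw [hcast, PySem.List.pyRange_one_succ_right (by omega),
      show (d : Int) + 1 + 1 = ((d : Int) + 1) + 1 by ring,
      PySem.List.pyRange_one_succ_right (by omega), List.foldl_append, List.foldl_append,
      List.foldl_cons, List.foldl_cons, List.foldl_nil, List.foldl_nil, ← heq]
    have hm : (d : Int) + 1 < n := by push_cast at hd; omega
    obtain ⟨he, hi⟩ := step_eq2 n _ d hm hInv'
    exact ⟨he, hi⟩

-- ===== VERDICT (by name: the statement is the Claim_ definition above) =====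
theorem ecoulement_spec : Claim_equal_ecoulement := by
  intro g n _ hpre
  obtain ⟨hg, hbig⟩ := hpre
  unfold Spec_ecoulement
  by_cases hn : 1 < n
  · obtain ⟨hgl, hrow0, hrows⟩ := hbig hn
    have h0 : 0 < g.length := List.length_pos_iff.mpr hg
    have hhead : g[0]?.getD [] = g.headD [] := by
      match g with
      | r :: t => rfl
    have hwj : ∀ j : Nat, 1 ≤ j → (j : Int) < n → ((g[j]?.getD []).length : Int) = n := by
      intro j h1 hj
      have hjl : j < g.length := by omega
      have hsome : ((g.drop 1).take (n.toNat - 1))[j - 1]? = some (g[j]?.getD []) := by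
        rw [List.getElem?_take, if_pos (by omega), List.getElem?_drop]
        have he : 1 + (j - 1) = j := by omega
        rw [he, List.getElem?_eq_getElem hjl]
        rfl
      exact hrows _ (List.mem_of_getElem? hsome)
    have hrowsN : ∀ j : Nat, (j : Int) < n → n ≤ ((g[j]?.getD []).length : Int) := by
      intro j hj
      match j with
      | 0 => rw [hhead]; exact hrow0
      | j + 1 => exact le_of_eq (hwj (j + 1) (by omega) hj).symm
    have hg1 := colorier_full g hg
    have hhead2 : (g.headD []).length = (g[0]?.getD []).length := by
      match g with
      | r :: t => rfl
    have hInv1 : Inv2 n (g.set 0 ((g.headD []).map fun v => if v = 1 then 2 else v)) := by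
      refine ⟨⟨by simpa using hgl, ?_⟩, ?_⟩
      · intro j hj
        by_cases hj0 : j = 0
        · subst hj0
          rw [List.getElem?_set_self (by omega), Option.getD_some, List.length_map, hhead2]
          exact hrowsN 0 (by omega)
        · rw [List.getElem?_set_ne (by omega)]
          exact hrowsN j hj
      · intro j h1 hj
        rw [List.getElem?_set_ne (by omega)]
        exact hwj j h1 hj
    have hmain := outer_loop n _ hInv1 (n - 1).toNat (by omega)
    rw [show (((n - 1).toNat : Nat) : Int) = n - 1 by omega,
      show n - 1 + 1 = n by ring] at hmain
    rw [ecoulement_fold, ecoulement_alt_fold, hg1]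
    exact hmain.1
  · rw [ecoulement_fold, ecoulement_alt_fold,
      PySem.List.pyRange_one_eq_nil (by omega), PySem.List.pyRange_one_eq_nil (by omega),
      List.foldl_nil, List.foldl_nil]
    exact colorier_full g hg
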